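-- pv_equiv track=rewrite | github.com/ananthrn/leetcode-practice | 2258-escape-the-spreading-fire/2258-escape-the-spreading-fire.py | getFireTimes
-- ===== SOURCE A (Python) =====
-- from typing import List
--
-- from collections import deque
--
-- def getFireTimes(grid: List[List[int]], fires: List[List[int]]) -> List[List[int]]:
--     m, n = len(grid), len(grid[0])
--     MAX_TIME = int(2e9)
--
--     fireTimes = [n * [MAX_TIME] for _ in range(m)]
--
--     Q = deque([(0, r, c) for (r, c) in fires])
--
--     while len(Q) > 0:
--         steps, r, c = Q.pop()
--         if fireTimes[r][c] == MAX_TIME: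
--             fireTimes[r][c] = steps
--             for nxt_r, nxt_c in (
--                 (r, c + 1),
--                 (r, c - 1),
--                 (r + 1, c),
--                 (r - 1, c)
--             ):
--                 if 0 <= nxt_r < m and 0 <= nxt_c < n:
--                     if fireTimes[nxt_r][nxt_c] == MAX_TIME and grid[nxt_r][nxt_c] == 0:
--                         Q.appendleft((steps + 1, nxt_r, nxt_c))
--
--     return fireTimes
-- ===== SOURCE B (Python) =====
-- from typing import List
--
--
-- def getFireTimes(grid: List[List[int]], fires: List[List[int]]) -> List[List[int]]:
--     m, n = len(grid), len(grid[0])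
--     MAX_TIME = int(2e9)
--
--     fireTimes = [n * [MAX_TIME] for _ in range(m)]
--
--     frontier = []
--     for r, c in fires:
--         if fireTimes[r][c] == MAX_TIME:
--             fireTimes[r][c] = 0
--             frontier.append((r, c))
--
--     time = 1
--     while frontier:
--         nxt = []
--         for r, c in frontier:
--             for nr, nc in ((r, c + 1), (r, c - 1), (r + 1, c), (r - 1, c)):
--                 if 0 <= nr < m and 0 <= nc < n \
--                         and fireTimes[nr][nc] == MAX_TIME and grid[nr][nc] == 0:
--                     fireTimes[nr][nc] = time
--                     nxt.append((nr, nc))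
--         frontier = nxt
--         time += 1
--
--     return fireTimes
-- ===== Notes on version B (the rewrite author's own statement) =====
-- stated objective: alternative
-- what changed: Replaces the deque of (steps,r,c) tuples with mark-on-dequeue by a level-order frontier BFS: fire cells are marked 0 and collected once (deduplicated on seeding), then an outer time counter advances per whole frontier and neighbors are marked on enqueue, so the queue never holds step counts or duplicate marked cells.
-- outside the precondition, e.g. on getFireTimes([[0, 0]], [[0, 0], [-1, 0]]): A returns [[0, 2000000000]], B returns [[0, 1]]
import Mathlib
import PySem

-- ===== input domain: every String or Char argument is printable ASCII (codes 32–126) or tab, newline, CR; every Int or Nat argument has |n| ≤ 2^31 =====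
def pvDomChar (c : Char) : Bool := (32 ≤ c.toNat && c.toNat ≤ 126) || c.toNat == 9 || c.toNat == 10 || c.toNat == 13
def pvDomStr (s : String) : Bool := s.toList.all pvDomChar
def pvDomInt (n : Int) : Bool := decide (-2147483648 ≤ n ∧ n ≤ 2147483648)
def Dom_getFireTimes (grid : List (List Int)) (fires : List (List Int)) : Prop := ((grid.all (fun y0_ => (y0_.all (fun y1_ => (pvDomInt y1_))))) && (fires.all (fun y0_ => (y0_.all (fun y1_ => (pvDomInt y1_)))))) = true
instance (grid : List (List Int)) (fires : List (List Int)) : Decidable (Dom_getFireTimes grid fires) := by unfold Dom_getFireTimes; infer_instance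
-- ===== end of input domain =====

-- B replaces A's deque of (steps,r,c) tuples (mark-on-dequeue) by a level-order frontier BFS
-- with an outer time counter and mark-on-enqueue; equal output on Pre_, no mutation observable.

-- ===== PORT A =====
-- Shared low-level helpers (used by both ports).  All indexed accesses that the claim covers
-- are guarded to be in range with nonnegative indices, where `.toNat`+`getD` is exact Python indexing.
def pvMAX : Int := 2000000000
-- Python list indexing: a negative index counts from the end (exact on indices in [-len, len))
def pvWrapI (len i : Int) : Int := if i < 0 then i + len else i
def pvIdx (len : Nat) (i : Int) : Nat := (pvWrapI (len : Int) i).toNat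
def pvNbrs (r c : Int) : List (Int × Int) := [(r, c + 1), (r, c - 1), (r + 1, c), (r - 1, c)]
def pvGet2 (t : List (List Int)) (r c : Int) : Int :=
  (t.getD (pvIdx t.length r) []).getD (pvIdx (t.getD (pvIdx t.length r) []).length c) 0
def pvSet2 (t : List (List Int)) (r c : Int) (v : Int) : List (List Int) :=
  t.set (pvIdx t.length r)
    ((t.getD (pvIdx t.length r) []).set (pvIdx (t.getD (pvIdx t.length r) []).length c) v)

-- the common enqueue guard: in bounds, not yet burning, passable ground
def pvCond (grid : List (List Int)) (m n : Int) (t : List (List Int)) (p : Int × Int) : Bool :=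
  decide (0 ≤ p.1 ∧ p.1 < m ∧ 0 ≤ p.2 ∧ p.2 < n ∧
    pvGet2 t p.1 p.2 = pvMAX ∧ pvGet2 grid p.1 p.2 = 0)

-- A's while-loop over the deque.  The deque is represented with its POP end (Python's right)
-- at the list head; `appendleft` is `++ [x]`.  Fuel only makes the recursion total: on every
-- input admitted by Pre_ it is proved sufficient (a potential over the queue and the table
-- strictly decreases with each pop).
def aLoop (grid : List (List Int)) (m n : Int) :
    Nat → List (Int × Int × Int) → List (List Int) → List (List Int)
  | 0, _, t => t
  | _ + 1, [], t => t
  | f + 1, (steps, r, c) :: rest, t =>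
    if pvGet2 t r c = pvMAX then
      aLoop grid m n f
        (rest ++ ((pvNbrs r c).filter (pvCond grid m n (pvSet2 t r c steps))).map
          (fun p => (steps + 1, p.1, p.2)))
        (pvSet2 t r c steps)
    else
      aLoop grid m n f rest t

def getFireTimes (grid : List (List Int)) (fires : List (List Int)) : List (List Int) :=
  let m : Int := (grid.length : Int)
  let n : Int := ((grid.headD []).length : Int)
  let fireTimes := List.replicate grid.length (List.replicate (grid.headD []).length pvMAX)
  let q := (fires.map (fun f => ((0 : Int), f.getD 0 0, f.getD 1 0))).reverse
  aLoop grid m n (fires.length + 20 * (grid.length * (grid.headD []).length) + 1) q fireTimes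

-- ===== PORT B =====
-- one candidate neighbor: mark on enqueue
def bCand (grid : List (List Int)) (m n time : Int)
    (st : List (List Int) × List (Int × Int)) (d : Int × Int) : List (List Int) × List (Int × Int) :=
  if pvCond grid m n st.1 d = true
  then (pvSet2 st.1 d.1 d.2 time, st.2 ++ [d])
  else st

-- one frontier cell: scan its four neighbors
def bLevel (grid : List (List Int)) (m n time : Int)
    (st : List (List Int) × List (Int × Int)) (rc : Int × Int) : List (List Int) × List (Int × Int) :=
  (pvNbrs rc.1 rc.2).foldl (bCand grid m n time) st

-- the while-loop over whole frontiers; fuel only makes it total (proved sufficient under Pre_)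
def bLoop (grid : List (List Int)) (m n : Int) :
    Nat → Int → List (Int × Int) → List (List Int) → List (List Int)
  | 0, _, _, t => t
  | f + 1, time, frontier, t =>
    if frontier = [] then t
    else
      bLoop grid m n f (time + 1)
        (frontier.foldl (bLevel grid m n time) (t, ([] : List (Int × Int)))).2
        (frontier.foldl (bLevel grid m n time) (t, ([] : List (Int × Int)))).1

-- seeding: mark every distinct fire cell 0 and collect it once
def bSeed (st : List (List Int) × List (Int × Int)) (f : List Int) : List (List Int) × List (Int × Int) :=
  if pvGet2 st.1 (f.getD 0 0) (f.getD 1 0) = pvMAX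
  then (pvSet2 st.1 (f.getD 0 0) (f.getD 1 0) 0, st.2 ++ [(f.getD 0 0, f.getD 1 0)])
  else st

def getFireTimes_alt (grid : List (List Int)) (fires : List (List Int)) : List (List Int) :=
  let m : Int := (grid.length : Int)
  let n : Int := ((grid.headD []).length : Int)
  let fireTimes := List.replicate grid.length (List.replicate (grid.headD []).length pvMAX)
  let st := fires.foldl bSeed (fireTimes, ([] : List (Int × Int)))
  bLoop grid m n (grid.length * (grid.headD []).length + 4) 1 st.2 st.1

-- ===== PRECONDITION & SPEC =====
-- Pre_ excludes exactly: inputs where A raises (empty grid, fire entries not of length 2,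
-- fire coordinates outside Python's index range [-m,m)x[-n,n), and — when there is at least
-- one fire — grids whose later rows are shorter than row 0, where a reached short row makes
-- A raise IndexError and reachability is not a closed-form condition), and distinct fire
-- coordinates that collide after Python's negative-index wraparound (the two implementations
-- then pick different raw coordinates to spread from, an accident of queue order).
def Pre_getFireTimes (grid : List (List Int)) (fires : List (List Int)) : Prop :=
  grid ≠ [] ∧
  (∀ f ∈ fires, f.length = 2 ∧ -(grid.length : Int) ≤ f.getD 0 0 ∧ f.getD 0 0 < (grid.length : Int) ∧
      -(((grid.headD []).length : Nat) : Int) ≤ f.getD 1 0 ∧ f.getD 1 0 < (((grid.headD []).length : Nat) : Int)) ∧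
  (∀ f ∈ fires, ∀ g ∈ fires,
      pvWrapI (grid.length : Int) (f.getD 0 0) = pvWrapI (grid.length : Int) (g.getD 0 0) →
      pvWrapI (((grid.headD []).length : Nat) : Int) (f.getD 1 0) = pvWrapI (((grid.headD []).length : Nat) : Int) (g.getD 1 0) →
      f.getD 0 0 = g.getD 0 0 ∧ f.getD 1 0 = g.getD 1 0) ∧
  (fires = [] ∨ ∀ row ∈ grid, (grid.headD []).length ≤ row.length)
instance (grid : List (List Int)) (fires : List (List Int)) : Decidable (Pre_getFireTimes grid fires) := by
  unfold Pre_getFireTimes; infer_instance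

def pvWitness_getFireTimes : List (List Int) × List (List Int) := ([[0, 1], [0, 0]], [[0, 0]])

def Spec_getFireTimes (grid : List (List Int)) (fires : List (List Int)) (out : List (List Int)) : Prop := out = getFireTimes_alt grid fires
instance (grid : List (List Int)) (fires : List (List Int)) (out : List (List Int)) : Decidable (Spec_getFireTimes grid fires out) := by unfold Spec_getFireTimes; infer_instance

-- ===== CLAIM (what is proved, stated in full; the proofs are below) =====
def Claim_equal_getFireTimes : Prop := ∀ (grid : List (List Int)) (fires : List (List Int)), Dom_getFireTimes grid fires → Pre_getFireTimes grid fires → Spec_getFireTimes grid fires (getFireTimes grid fires)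

-- ===== LEMMAS AND PROOFS =====

-- the sentinel as a number of BFS levels; levels whose time equals it are written as a
-- no-op by both programs, which the fire-spread model below accounts for explicitly
def pvMAXN : Nat := 2000000000

-- context: the grid, its dimensions and the (already validated) raw fire coordinates
structure PvCtx where
  grid : List (List Int)
  mN : Nat
  nN : Nat
  fires0 : List (Int × Int)

def pvInB (C : PvCtx) (p : Int × Int) : Bool :=
  decide (0 ≤ p.1) && decide (p.1 < (C.mN : Int)) && decide (0 ≤ p.2) && decide (p.2 < (C.nN : Int))

def pvOk (C : PvCtx) (p : Int × Int) : Bool :=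
  pvInB C p && decide (pvGet2 C.grid p.1 p.2 = 0)

-- the wrapped (actual) cell of a possibly negative fire coordinate pair
def pvW (C : PvCtx) (p : Int × Int) : Int × Int :=
  (pvWrapI (C.mN : Int) p.1, pvWrapI (C.nN : Int) p.2)

def pvWrapRange (C : PvCtx) (p : Int × Int) : Prop :=
  -(C.mN : Int) ≤ p.1 ∧ p.1 < (C.mN : Int) ∧ -(C.nN : Int) ≤ p.2 ∧ p.2 < (C.nN : Int)

def pvGoodCtx (C : PvCtx) : Prop :=
  (∀ p ∈ C.fires0, pvWrapRange C p) ∧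
  (∀ p ∈ C.fires0, ∀ q ∈ C.fires0, pvW C p = pvW C q → p = q)

-- the finite set of in-bounds cells
def pvAll (C : PvCtx) : Finset (Int × Int) :=
  ((Finset.range C.mN) ×ˢ (Finset.range C.nN)).image (fun q => ((q.1 : Int), (q.2 : Int)))

def pvNbrF (C : PvCtx) (c : Int × Int) : Finset (Int × Int) :=
  ((pvNbrs c.1 c.2).filter (pvOk C)).toFinset

-- The fire-spread model.  pvRS C k = (R_k, N_k): R_k the cells burnt (stored value ≠ MAX)
-- once level k is complete, N_k the cells newly reached at level k (the level-k sources,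
-- whether or not the write of the value k sticks: at k = pvMAXN the programs write the
-- sentinel itself, a no-op, so those cells stay unburnt yet still spread the fire).
def pvRS (C : PvCtx) : Nat → Finset (Int × Int) × Finset (Int × Int)
  | 0 => ((C.fires0.map (pvW C)).toFinset, ∅)
  | k + 1 =>
    ((if k + 1 = pvMAXN then (pvRS C k).1
      else (pvRS C k).1 ∪
        (((if k = 0 then C.fires0.toFinset else (pvRS C k).2).biUnion (pvNbrF C)) \ (pvRS C k).1)),
     ((if k = 0 then C.fires0.toFinset else (pvRS C k).2).biUnion (pvNbrF C)) \ (pvRS C k).1)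

def pvR (C : PvCtx) (k : Nat) : Finset (Int × Int) := (pvRS C k).1
def pvN (C : PvCtx) (k : Nat) : Finset (Int × Int) := (pvRS C k).2

-- the level-k expansion sources as a Finset (raw coordinates at level 0)
def pvSrcF (C : PvCtx) (k : Nat) : Finset (Int × Int) :=
  if k = 0 then C.fires0.toFinset else pvN C k

def pvRN (C : PvCtx) (k : Nat) : Finset (Int × Int) := pvR C k ∪ pvN C k

-- first level at which p is burnt
def pvAssign (C : PvCtx) (p : Int × Int) (k : Nat) : Prop :=
  p ∈ pvR C k ∧ ∀ j < k, p ∉ pvR C j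

def pvFinal (C : PvCtx) (v : Int) (p : Int × Int) : Prop :=
  (∃ k, pvAssign C p k ∧ v = (k : Int)) ∨ ((∀ k, p ∉ pvR C k) ∧ v = pvMAX)

def pvIsSrc (C : PvCtx) (k : Nat) (p : Int × Int) : Prop :=
  if k = 0 then p ∈ C.fires0 else p ∈ pvN C k

-- the cell a raw level-k coordinate pair stands for
def pvCellAt (C : PvCtx) (k : Nat) (p : Int × Int) : Int × Int :=
  if k = 0 then pvW C p else p

def pvShape (C : PvCtx) (t : List (List Int)) : Prop :=
  t.length = C.mN ∧ ∀ row ∈ t, row.length = C.nN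

def pvCntU (C : PvCtx) (t : List (List Int)) : Nat :=
  ((pvAll C).filter (fun p => pvGet2 t p.1 p.2 = pvMAX)).card

-- ---------- model lemmas ----------

lemma pvR_succ (C : PvCtx) (k : Nat) :
    pvR C (k+1) = if k + 1 = pvMAXN then pvR C k else pvR C k ∪ pvN C (k+1) := rfl

lemma pvN_succ (C : PvCtx) (k : Nat) :
    pvN C (k+1) = ((pvSrcF C k).biUnion (pvNbrF C)) \ pvR C k := by
  simp only [pvN, pvRS, pvSrcF, pvR]

lemma pvR_zero (C : PvCtx) : pvR C 0 = (C.fires0.map (pvW C)).toFinset := rfl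

lemma pvR_mono_succ (C : PvCtx) (k : Nat) : pvR C k ⊆ pvR C (k+1) := by
  rw [pvR_succ]; split
  · exact Finset.Subset.refl _
  · exact Finset.subset_union_left

lemma pvR_mono (C : PvCtx) {j k : Nat} (h : j ≤ k) : pvR C j ⊆ pvR C k := by
  induction k with
  | zero => simp [Nat.le_zero.mp h]
  | succ k ih =>
    rcases Nat.lt_or_ge j (k+1) with hlt | hge
    · exact fun p hp => pvR_mono_succ C k (ih (Nat.lt_succ_iff.mp hlt) hp)
    · have : j = k+1 := le_antisymm h hge
      subst this; exact fun p hp => hp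

lemma pvN_disj (C : PvCtx) (k : Nat) : ∀ p ∈ pvN C (k+1), p ∉ pvR C k := by
  intro p hp
  rw [pvN_succ, Finset.mem_sdiff] at hp
  exact hp.2

lemma pvN_subset_R (C : PvCtx) {k : Nat} (h : k + 1 ≠ pvMAXN) : pvN C (k+1) ⊆ pvR C (k+1) := by
  rw [pvR_succ, if_neg h]
  exact Finset.subset_union_right

lemma pvMem_N_intro (C : PvCtx) {k : Nat} {c d : Int × Int}
    (hc : c ∈ pvSrcF C k) (hd : d ∈ pvNbrF C c) (hnd : d ∉ pvR C k) : d ∈ pvN C (k+1) := by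
  rw [pvN_succ, Finset.mem_sdiff, Finset.mem_biUnion]
  exact ⟨⟨c, hc, hd⟩, hnd⟩

lemma pvMem_N_elim (C : PvCtx) {k : Nat} {d : Int × Int} (hd : d ∈ pvN C (k+1)) :
    (∃ c ∈ pvSrcF C k, d ∈ pvNbrF C c) ∧ d ∉ pvR C k := by
  rw [pvN_succ, Finset.mem_sdiff, Finset.mem_biUnion] at hd
  exact hd

lemma pvAssign_of_mem (C : PvCtx) {p : Int × Int} {k : Nat} (h : p ∈ pvR C k) :
    ∃ j ≤ k, pvAssign C p j := by
  induction k with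
  | zero => exact ⟨0, le_refl 0, h, by intro j hj; omega⟩
  | succ k ih =>
    by_cases hk : p ∈ pvR C k
    · obtain ⟨j, hj, hl⟩ := ih hk
      exact ⟨j, Nat.le_succ_of_le hj, hl⟩
    · refine ⟨k+1, le_refl _, h, ?_⟩
      intro j hj hmem
      exact hk (pvR_mono C (Nat.lt_succ_iff.mp hj) hmem)

lemma pvAssign_unique (C : PvCtx) {p : Int × Int} {j k : Nat}
    (hj : pvAssign C p j) (hk : pvAssign C p k) : j = k := by
  rcases Nat.lt_trichotomy j k with h | h | h
  · exact absurd hj.1 (hk.2 j h)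
  · exact h
  · exact absurd hk.1 (hj.2 k h)

lemma pvAssign_ne_MAXN (C : PvCtx) {p : Int × Int} {k : Nat} (h : pvAssign C p k) :
    k ≠ pvMAXN := by
  intro hk
  cases k with
  | zero => simp [pvMAXN] at hk
  | succ k' =>
    have : pvR C (k'+1) = pvR C k' := by rw [pvR_succ, if_pos hk]
    have hp := h.1
    rw [this] at hp
    exact h.2 k' (Nat.lt_succ_self k') hp

lemma pvFinal_unique (C : PvCtx) {p : Int × Int} {v w : Int}
    (hv : pvFinal C v p) (hw : pvFinal C w p) : v = w := by
  rcases hv with ⟨j, hj, rfl⟩ | ⟨hnv, rfl⟩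
  · rcases hw with ⟨i, hi, rfl⟩ | ⟨hnw, rfl⟩
    · exact congrArg _ (pvAssign_unique C hj hi)
    · exact absurd hj.1 (hnw j)
  · rcases hw with ⟨i, hi, rfl⟩ | ⟨_, rfl⟩
    · exact absurd hi.1 (hnv i)
    · rfl

lemma pvMem_all_iff (C : PvCtx) (p : Int × Int) : p ∈ pvAll C ↔ pvInB C p = true := by
  simp only [pvAll, pvInB, Finset.mem_image, Finset.mem_product, Finset.mem_range,
    Bool.and_eq_true, decide_eq_true_eq]
  constructor
  · rintro ⟨⟨a, b⟩, ⟨ha, hb⟩, rfl⟩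
    refine ⟨⟨⟨by positivity, ?_⟩, by positivity⟩, ?_⟩ <;> simp <;> omega
  · rintro ⟨⟨⟨h1, h2⟩, h3⟩, h4⟩
    refine ⟨(p.1.toNat, p.2.toNat), ⟨?_, ?_⟩, ?_⟩
    · omega
    · omega
    · ext <;> simp <;> omega

lemma pvMem_all_iff' (C : PvCtx) (p : Int × Int) : p ∈ pvAll C ↔
    (0 ≤ p.1 ∧ p.1 < (C.mN : Int) ∧ 0 ≤ p.2 ∧ p.2 < (C.nN : Int)) := by
  rw [pvMem_all_iff]
  simp only [pvInB, Bool.and_eq_true, decide_eq_true_eq]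
  tauto

lemma pvInB_iff (C : PvCtx) (p : Int × Int) : pvInB C p = true ↔
    (0 ≤ p.1 ∧ p.1 < (C.mN : Int) ∧ 0 ≤ p.2 ∧ p.2 < (C.nN : Int)) := by
  rw [← pvMem_all_iff, pvMem_all_iff']

lemma pvW_inB (C : PvCtx) {p : Int × Int} (h : pvWrapRange C p) : pvInB C (pvW C p) = true := by
  rw [pvInB_iff]
  obtain ⟨h1, h2, h3, h4⟩ := h
  simp only [pvW, pvWrapI]
  refine ⟨?_, ?_, ?_, ?_⟩ <;> split_ifs <;> omega

lemma pvOk_inB (C : PvCtx) {d : Int × Int} (h : pvOk C d = true) : pvInB C d = true := by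
  simp only [pvOk, Bool.and_eq_true] at h
  exact h.1

lemma pvCard_all (C : PvCtx) : (pvAll C).card = C.mN * C.nN := by
  rw [pvAll, Finset.card_image_of_injective, Finset.card_product, Finset.card_range,
    Finset.card_range]
  intro a b hab
  ext
  · have := congrArg Prod.fst hab; simpa using this
  · have := congrArg Prod.snd hab; simpa using this

lemma pvNbrF_subset_all (C : PvCtx) (c : Int × Int) : pvNbrF C c ⊆ pvAll C := by
  intro d hd
  rw [pvNbrF, List.mem_toFinset, List.mem_filter] at hd
  rw [pvMem_all_iff]
  exact pvOk_inB C hd.2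

lemma pvR_subset_all (C : PvCtx) (hC : pvGoodCtx C) (k : Nat) : pvR C k ⊆ pvAll C := by
  induction k with
  | zero =>
    intro p hp
    rw [pvR_zero, List.mem_toFinset, List.mem_map] at hp
    obtain ⟨r, hr, rfl⟩ := hp
    rw [pvMem_all_iff]
    exact pvW_inB C (hC.1 r hr)
  | succ k ih =>
    intro p hp
    rw [pvR_succ] at hp
    split at hp
    · exact ih hp
    · rcases Finset.mem_union.mp hp with hp | hp
      · exact ih hp
      · obtain ⟨⟨c, _, hd⟩, _⟩ := pvMem_N_elim C hp
        exact pvNbrF_subset_all C c hd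

lemma pvN_subset_all (C : PvCtx) (k : Nat) : pvN C (k+1) ⊆ pvAll C := by
  intro p hp
  obtain ⟨⟨c, _, hd⟩, _⟩ := pvMem_N_elim C hp
  exact pvNbrF_subset_all C c hd

-- once a level produces no new cell the spread is over
lemma pvStab (C : PvCtx) {k : Nat} (h : pvN C (k+1) = ∅) :
    ∀ j, k ≤ j → pvR C j = pvR C k ∧ (k + 1 ≤ j → pvN C j = ∅) := by
  intro j hj
  induction j with
  | zero => exact ⟨by rw [Nat.le_zero.mp hj], by omega⟩
  | succ j ih =>
    rcases Nat.lt_or_ge k (j+1) with hlt | hge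
    · have hj' : k ≤ j := Nat.lt_succ_iff.mp hlt
      obtain ⟨hR, hN⟩ := ih hj'
      have hNj1 : pvN C (j+1) = ∅ := by
        rcases Nat.lt_or_ge k j with hkj | hkj
        · have hNj : pvN C j = ∅ := hN (by omega)
          rw [pvN_succ]
          have hsrc : pvSrcF C j = ∅ := by
            rw [pvSrcF, if_neg (by omega : ¬ j = 0)]
            exact hNj
          rw [hsrc]
          simp
        · have : j = k := by omega
          subst this
          exact h
      refine ⟨?_, fun _ => hNj1⟩
      rw [pvR_succ]
      split
      · exact hR
      · rw [hNj1, Finset.union_empty]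
        exact hR
    · have : j + 1 = k := by omega
      rw [this]
      exact ⟨rfl, by omega⟩

-- a live level index is bounded by the number of burnt cells (one stalled level possible)
lemma pvN_card_aux (C : PvCtx) :
    ∀ k, (pvN C (k+1)).Nonempty →
      k + 1 ≤ (pvR C (k+1)).card + (if pvMAXN ≤ k + 1 then 2 else 1) := by
  intro k
  induction k with
  | zero =>
    intro _
    split <;> omega
  | succ k ih =>
    intro hne
    have hsrcne : (pvN C (k+1)).Nonempty := by
      obtain ⟨d, hd⟩ := hne
      obtain ⟨⟨c, hc, _⟩, _⟩ := pvMem_N_elim C hd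
      rw [pvSrcF, if_neg (Nat.succ_ne_zero k)] at hc
      exact ⟨c, hc⟩
    have hih := ih hsrcne
    by_cases hstall : k + 1 + 1 = pvMAXN
    · have hR : pvR C (k+1+1) = pvR C (k+1) := by rw [pvR_succ, if_pos hstall]
      have h1 : ¬ pvMAXN ≤ k + 1 := by omega
      rw [if_pos (by omega : pvMAXN ≤ k + 1 + 1), hR]
      rw [if_neg h1] at hih
      omega
    · have hR : pvR C (k+1+1) = pvR C (k+1) ∪ pvN C (k+1+1) := by rw [pvR_succ, if_neg hstall]
      have hdisj : Disjoint (pvR C (k+1)) (pvN C (k+1+1)) := by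
        rw [Finset.disjoint_right]
        intro p hp
        exact pvN_disj C (k+1) p hp
      have hcard : (pvR C (k+1+1)).card = (pvR C (k+1)).card + (pvN C (k+1+1)).card := by
        rw [hR, Finset.card_union_of_disjoint hdisj]
      have hpos : 0 < (pvN C (k+1+1)).card := Finset.card_pos.mpr hne
      have hmono : (if pvMAXN ≤ k + 1 then (2:Nat) else 1) ≤ (if pvMAXN ≤ k + 1 + 1 then 2 else 1) := by
        split_ifs <;> omega
      omega

lemma pvN_card (C : PvCtx) (hC : pvGoodCtx C) {k : Nat} (hne : (pvN C k).Nonempty) :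
    k ≤ C.mN * C.nN + 2 := by
  cases k with
  | zero => omega
  | succ k' =>
    have h1 := pvN_card_aux C k' hne
    have h2 : (pvR C (k'+1)).card ≤ C.mN * C.nN := by
      rw [← pvCard_all C]
      exact Finset.card_le_card (pvR_subset_all C hC (k'+1))
    split at h1 <;> omega

-- ---------- array lemmas ----------

lemma pvIdx_of_nonneg (len : Nat) {i : Int} (h : 0 ≤ i) : pvIdx len i = i.toNat := by
  simp only [pvIdx, pvWrapI, if_neg (by omega : ¬ i < 0)]

lemma pvIdx_natCast (len i : Nat) : pvIdx len (i : Int) = i := by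
  rw [pvIdx_of_nonneg _ (Int.natCast_nonneg i), Int.toNat_natCast]

lemma pvShape_set (C : PvCtx) {t : List (List Int)} (h : pvShape C t) {q : Int × Int}
    (hq : pvInB C q = true) (v : Int) : pvShape C (pvSet2 t q.1 q.2 v) := by
  rw [pvInB_iff] at hq
  have hm := h.1
  simp only [pvSet2, pvIdx_of_nonneg _ hq.1, pvIdx_of_nonneg _ hq.2.2.1]
  have hlt : q.1.toNat < t.length := by omega
  refine ⟨by simp [h.1], ?_⟩
  intro row hrow
  rcases List.mem_or_eq_of_mem_set hrow with hmem | rfl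
  · exact h.2 row hmem
  · rw [List.length_set, List.getD_eq_getElem t [] hlt]
    exact h.2 _ (List.getElem_mem hlt)

lemma pvGet2_set_same (C : PvCtx) {t : List (List Int)} (h : pvShape C t) {p : Int × Int}
    (hp : pvInB C p = true) (v : Int) : pvGet2 (pvSet2 t p.1 p.2 v) p.1 p.2 = v := by
  rw [pvInB_iff] at hp
  have hm := h.1
  simp only [pvGet2, pvSet2, pvIdx_of_nonneg _ hp.1, pvIdx_of_nonneg _ hp.2.2.1]
  have h1 : p.1.toNat < t.length := by omega
  have hrow : t.getD p.1.toNat [] = t[p.1.toNat] := List.getD_eq_getElem t [] h1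
  have h2 : p.2.toNat < (t[p.1.toNat]).length := by
    have := h.2 _ (List.getElem_mem h1); omega
  rw [List.getD_eq_getElem _ [] (by simpa using h1), List.getElem_set_self,
    hrow, List.getD_eq_getElem _ 0 (by simpa using h2), List.getElem_set_self]

lemma pvGet2_set_other (C : PvCtx) {t : List (List Int)} (h : pvShape C t) {p q : Int × Int}
    (hp : pvInB C p = true) (hq : pvInB C q = true) (hne : p ≠ q) (v : Int) :
    pvGet2 (pvSet2 t q.1 q.2 v) p.1 p.2 = pvGet2 t p.1 p.2 := by
  rw [pvInB_iff] at hp hq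
  have hm := h.1
  simp only [pvGet2, pvSet2, pvIdx_of_nonneg _ hp.1, pvIdx_of_nonneg _ hp.2.2.1,
    pvIdx_of_nonneg _ hq.1, pvIdx_of_nonneg _ hq.2.2.1]
  have hql : q.1.toNat < t.length := by omega
  have hpl : p.1.toNat < t.length := by omega
  by_cases hr : p.1.toNat = q.1.toNat
  · have hr' : p.1 = q.1 := by omega
    have hc : p.2.toNat ≠ q.2.toNat := by
      intro hcc
      exact hne (Prod.ext hr' (by omega))
    have hrow := List.getD_eq_getElem t [] hql
    simp only [hr]
    rw [List.getD_eq_getElem _ [] (by simpa using hql), List.getElem_set_self, hrow]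
    rcases Nat.lt_or_ge p.2.toNat (t[q.1.toNat]).length with hlt | hge
    · rw [List.getD_eq_getElem _ 0 (by simpa using hlt), List.getD_eq_getElem _ 0 hlt,
        List.getElem_set_ne (by omega)]
    · rw [List.getD_eq_default _ 0 (by simpa using hge), List.getD_eq_default _ 0 hge]
  · rw [List.getD_eq_getElem _ [] (by simpa using hpl),
      List.getElem_set_ne (by omega), List.getD_eq_getElem t [] hpl]

lemma pvShape_init (C : PvCtx) : pvShape C (List.replicate C.mN (List.replicate C.nN pvMAX)) := by
  refine ⟨by simp, ?_⟩
  intro row hrow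
  rw [List.eq_of_mem_replicate hrow]
  simp

lemma pvGet2_init (C : PvCtx) {p : Int × Int} (hp : pvInB C p = true) :
    pvGet2 (List.replicate C.mN (List.replicate C.nN pvMAX)) p.1 p.2 = pvMAX := by
  rw [pvInB_iff] at hp
  simp only [pvGet2, pvIdx_of_nonneg _ hp.1, pvIdx_of_nonneg _ hp.2.2.1]
  rw [List.getD_eq_getElem _ [] (by simpa using (by omega : p.1.toNat < C.mN)),
    List.getElem_replicate,
    List.getD_eq_getElem _ 0 (by simpa using (by omega : p.2.toNat < C.nN)),
    List.getElem_replicate]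

-- Python indexing with a possibly negative (wrap-range) coordinate touches the wrapped cell
lemma pvGet2_wrap (C : PvCtx) {t : List (List Int)} (hsh : pvShape C t) {p : Int × Int}
    (h : pvWrapRange C p) : pvGet2 t p.1 p.2 = pvGet2 t (pvW C p).1 (pvW C p).2 := by
  obtain ⟨h1, h2, h3, h4⟩ := h
  have hm := hsh.1
  have hrow : pvIdx t.length p.1 = pvIdx t.length (pvW C p).1 := by
    simp only [pvIdx, pvW, pvWrapI, hm]
    split_ifs <;> omega
  have hidx : pvIdx t.length (pvW C p).1 < t.length := by
    simp only [pvIdx, pvW, pvWrapI, hm]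
    split_ifs <;> omega
  have hlen : (t.getD (pvIdx t.length (pvW C p).1) []).length = C.nN := by
    rw [List.getD_eq_getElem t [] hidx]
    exact hsh.2 _ (List.getElem_mem hidx)
  have hcol : ∀ L : Nat, L = C.nN → pvIdx L p.2 = pvIdx L (pvW C p).2 := by
    intro L hL
    simp only [pvIdx, pvW, pvWrapI, hL]
    split_ifs <;> omega
  simp only [pvGet2, hrow, hcol _ hlen]

lemma pvSet2_wrap (C : PvCtx) {t : List (List Int)} (hsh : pvShape C t) {p : Int × Int}
    (h : pvWrapRange C p) (v : Int) : pvSet2 t p.1 p.2 v = pvSet2 t (pvW C p).1 (pvW C p).2 v := by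
  obtain ⟨h1, h2, h3, h4⟩ := h
  have hm := hsh.1
  have hrow : pvIdx t.length p.1 = pvIdx t.length (pvW C p).1 := by
    simp only [pvIdx, pvW, pvWrapI, hm]
    split_ifs <;> omega
  have hidx : pvIdx t.length (pvW C p).1 < t.length := by
    simp only [pvIdx, pvW, pvWrapI, hm]
    split_ifs <;> omega
  have hlen : (t.getD (pvIdx t.length (pvW C p).1) []).length = C.nN := by
    rw [List.getD_eq_getElem t [] hidx]
    exact hsh.2 _ (List.getElem_mem hidx)
  have hcol : ∀ L : Nat, L = C.nN → pvIdx L p.2 = pvIdx L (pvW C p).2 := by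
    intro L hL
    simp only [pvIdx, pvW, pvWrapI, hL]
    split_ifs <;> omega
  simp only [pvSet2, hrow, hcol _ hlen]

lemma pvCntU_set (C : PvCtx) {t : List (List Int)} (h : pvShape C t) {c : Int × Int}
    (hc : pvInB C c = true) (hold : pvGet2 t c.1 c.2 = pvMAX) {v : Int} (hv : v ≠ pvMAX) :
    pvCntU C (pvSet2 t c.1 c.2 v) + 1 = pvCntU C t := by
  have hmem : c ∈ (pvAll C).filter (fun p => pvGet2 t p.1 p.2 = pvMAX) := by
    rw [Finset.mem_filter, pvMem_all_iff]
    exact ⟨hc, hold⟩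
  have hfe : (pvAll C).filter (fun p => pvGet2 (pvSet2 t c.1 c.2 v) p.1 p.2 = pvMAX) =
      ((pvAll C).filter (fun p => pvGet2 t p.1 p.2 = pvMAX)).erase c := by
    ext q
    rw [Finset.mem_erase, Finset.mem_filter, Finset.mem_filter]
    constructor
    · intro ⟨hq, hval⟩
      have hqi := (pvMem_all_iff C q).mp hq
      by_cases hqc : q = c
      · subst hqc
        rw [pvGet2_set_same C h hqi v] at hval
        exact absurd hval hv
      · rw [pvGet2_set_other C h hqi hc hqc v] at hval
        exact ⟨hqc, hq, hval⟩
    · intro ⟨hqc, hq, hval⟩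
      have hqi := (pvMem_all_iff C q).mp hq
      rw [pvGet2_set_other C h hqi hc hqc v]
      exact ⟨hq, hval⟩
  unfold pvCntU
  rw [hfe, Finset.card_erase_of_mem hmem]
  have := Finset.card_pos.mpr ⟨c, hmem⟩
  omega

lemma pvCntU_congr (C : PvCtx) {t t' : List (List Int)}
    (h : ∀ p, pvInB C p = true → pvGet2 t' p.1 p.2 = pvGet2 t p.1 p.2) :
    pvCntU C t' = pvCntU C t := by
  unfold pvCntU
  congr 1
  apply Finset.filter_congr
  intro p hp
  rw [h p ((pvMem_all_iff C p).mp hp)]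

lemma pvCntU_le (C : PvCtx) (t : List (List Int)) : pvCntU C t ≤ C.mN * C.nN := by
  rw [← pvCard_all C]
  exact Finset.card_le_card (Finset.filter_subset _ _)

-- ---------- A-side invariant ----------

def pvHandled (B : List (Int × Int × Int)) (t : List (List Int)) (d : Int × Int) : Prop :=
  pvGet2 t d.1 d.2 ≠ pvMAX ∨ ∃ e ∈ B, e.2 = d

-- a level-k source has been expanded: its cell is burnt (unless the level stalls at the
-- sentinel) and every passable neighbor is burnt or queued for the next level
def pvExp (C : PvCtx) (k : Nat) (B : List (Int × Int × Int)) (t : List (List Int))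
    (p : Int × Int) : Prop :=
  (k ≠ pvMAXN → pvGet2 t (pvCellAt C k p).1 (pvCellAt C k p).2 ≠ pvMAX) ∧
  ∀ d ∈ pvNbrs p.1 p.2, pvOk C d = true → pvHandled B t d

structure pvAInv (C : PvCtx) (k : Nat) (F B : List (Int × Int × Int)) (t : List (List Int)) : Prop where
  shape : pvShape C t
  hF : ∀ e ∈ F, e.1 = (k : Int) ∧ pvCellAt C k e.2 ∈ pvRN C k ∧ (k = 0 → e.2 ∈ C.fires0)
  hB : ∀ e ∈ B, e.1 = (k : Int) + 1 ∧ e.2 ∈ pvRN C (k+1)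
  hval : ∀ p, pvInB C p = true → pvGet2 t p.1 p.2 ≠ pvMAX →
    ∃ j ≤ k, pvAssign C p j ∧ pvGet2 t p.1 p.2 = (j : Int)
  hprev : ∀ j < k, ∀ p ∈ pvR C j, pvGet2 t p.1 p.2 ≠ pvMAX
  hsrc : ∀ p, pvIsSrc C k p → (∃ e ∈ F, e.2 = p) ∨ pvExp C k B t p
  hexp : ∀ p, pvIsSrc C k p →
    pvGet2 t (pvCellAt C k p).1 (pvCellAt C k p).2 ≠ pvMAX → pvExp C k B t p

def pvPhi (C : PvCtx) (Q : List (Int × Int × Int)) (t : List (List Int)) : Nat :=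
  Q.length + 20 * pvCntU C t + 4 * Q.countP (fun e => decide (e.1 = pvMAX))

lemma pvW_mem_R0 (C : PvCtx) {r : Int × Int} (h : r ∈ C.fires0) : pvW C r ∈ pvR C 0 := by
  rw [pvR_zero, List.mem_toFinset, List.mem_map]
  exact ⟨r, h, rfl⟩

lemma pvIsSrc_mem_srcF (C : PvCtx) {k : Nat} {p : Int × Int} (h : pvIsSrc C k p) :
    p ∈ pvSrcF C k := by
  cases k with
  | zero =>
    rw [pvIsSrc, if_pos rfl] at h
    rw [pvSrcF, if_pos rfl, List.mem_toFinset]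
    exact h
  | succ k' =>
    rw [pvIsSrc, if_neg (Nat.succ_ne_zero k')] at h
    rw [pvSrcF, if_neg (Nat.succ_ne_zero k')]
    exact h

lemma pvSrcF_mem_isSrc (C : PvCtx) {k : Nat} {p : Int × Int} (h : p ∈ pvSrcF C k) :
    pvIsSrc C k p := by
  cases k with
  | zero =>
    rw [pvSrcF, if_pos rfl, List.mem_toFinset] at h
    rw [pvIsSrc, if_pos rfl]
    exact h
  | succ k' =>
    rw [pvSrcF, if_neg (Nat.succ_ne_zero k')] at h
    rw [pvIsSrc, if_neg (Nat.succ_ne_zero k')]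
    exact h

lemma pvCellAt_inB (C : PvCtx) (hC : pvGoodCtx C) {k : Nat} {p : Int × Int}
    (h : pvIsSrc C k p) : pvInB C (pvCellAt C k p) = true := by
  cases k with
  | zero =>
    rw [pvIsSrc, if_pos rfl] at h
    rw [pvCellAt, if_pos rfl]
    exact pvW_inB C (hC.1 p h)
  | succ k' =>
    rw [pvIsSrc, if_neg (Nat.succ_ne_zero k')] at h
    rw [pvCellAt, if_neg (Nat.succ_ne_zero k')]
    rw [← pvMem_all_iff]
    exact pvN_subset_all C k' h

lemma pvMAX_cast_iff (k : Nat) : ((k : Int) = pvMAX) ↔ k = pvMAXN := by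
  simp only [pvMAX, pvMAXN]
  omega

lemma pvMAX_succ_cast_iff (k : Nat) : ((k : Int) + 1 = pvMAX) ↔ k + 1 = pvMAXN := by
  simp only [pvMAX, pvMAXN]
  omega

-- with no pending level-k work every burnt-by-level-k cell is marked
lemma pvRk_marked (C : PvCtx) {k : Nat} {B : List (Int × Int × Int)} {t : List (List Int)}
    (hI : pvAInv C k [] B t) : ∀ p ∈ pvR C k, pvGet2 t p.1 p.2 ≠ pvMAX := by
  intro p hp
  obtain ⟨j, hj, hassign⟩ := pvAssign_of_mem C hp
  rcases Nat.lt_or_ge j k with hlt | hge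
  · exact hI.hprev j hlt p (pvR_mono C (le_refl j) hassign.1)
  · have hjk : j = k := le_antisymm hj hge
    rw [hjk] at hassign
    clear hj hge
    cases k with
    | zero =>
      have h0 : p ∈ pvR C 0 := hassign.1
      rw [pvR_zero, List.mem_toFinset, List.mem_map] at h0
      obtain ⟨r, hr, rfl⟩ := h0
      have hsrc : pvIsSrc C 0 r := by rw [pvIsSrc, if_pos rfl]; exact hr
      rcases hI.hsrc r hsrc with ⟨e, he, _⟩ | hexp
      · simp at he
      · have := hexp.1 (by simp [pvMAXN])
        rwa [pvCellAt, if_pos rfl] at this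
    | succ k' =>
      have hne : k' + 1 ≠ pvMAXN := pvAssign_ne_MAXN C hassign
      have hpN : p ∈ pvN C (k'+1) := by
        have h1 := hassign.1
        rw [pvR_succ, if_neg hne] at h1
        rcases Finset.mem_union.mp h1 with h1 | h1
        · exact absurd h1 (hassign.2 k' (Nat.lt_succ_self k'))
        · exact h1
      have hsrc : pvIsSrc C (k'+1) p := by
        rw [pvIsSrc, if_neg (Nat.succ_ne_zero k')]; exact hpN
      rcases hI.hsrc p hsrc with ⟨e, he, _⟩ | hexp
      · simp at he
      · have := hexp.1 hne
        rwa [pvCellAt, if_neg (Nat.succ_ne_zero k')] at this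

-- with no pending work at all the spread has stabilised
lemma pvNext_empty (C : PvCtx) {k : Nat} {t : List (List Int)}
    (hI : pvAInv C k [] [] t) : pvN C (k+1) = ∅ := by
  by_contra hne
  obtain ⟨d, hd⟩ := Finset.nonempty_iff_ne_empty.mpr hne
  obtain ⟨⟨c, hc, hdF⟩, hdR⟩ := pvMem_N_elim C hd
  rw [pvNbrF, List.mem_toFinset, List.mem_filter] at hdF
  rcases hI.hsrc c (pvSrcF_mem_isSrc C hc) with ⟨e, he, _⟩ | hexp
  · simp at he
  · rcases hexp.2 d hdF.1 hdF.2 with hm | ⟨e, he, _⟩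
    · have hdin : pvInB C d = true := pvOk_inB C hdF.2
      obtain ⟨j, hj, hassign, _⟩ := hI.hval d hdin hm
      exact hdR (pvR_mono C hj hassign.1)
    · simp at he

-- ---------- the A-side pop step ----------

lemma pvALoop_pop (C : PvCtx) (hC : pvGoodCtx C) (f : Nat)
    (ih : ∀ (k : Nat) (F B : List (Int × Int × Int)) (t : List (List Int)),
      pvAInv C k F B t → pvPhi C (F ++ B) t < f →
      pvShape C (aLoop C.grid (C.mN : Int) (C.nN : Int) f (F ++ B) t) ∧
      ∀ p, pvInB C p = true →
        pvFinal C (pvGet2 (aLoop C.grid (C.mN : Int) (C.nN : Int) f (F ++ B) t) p.1 p.2) p) :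
    ∀ (k : Nat) (s : Int) (q1 q2 : Int) (F' B : List (Int × Int × Int)) (t : List (List Int)),
      pvAInv C k ((s, q1, q2) :: F') B t →
      pvPhi C (((s, q1, q2) :: F') ++ B) t < f + 1 →
      pvShape C (aLoop C.grid (C.mN : Int) (C.nN : Int) (f + 1) ((s, q1, q2) :: (F' ++ B)) t) ∧
      ∀ p, pvInB C p = true →
        pvFinal C (pvGet2 (aLoop C.grid (C.mN : Int) (C.nN : Int) (f + 1) ((s, q1, q2) :: (F' ++ B)) t) p.1 p.2) p := by
  intro k s q1 q2 F' B t hI hb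
  obtain ⟨hsk, hqRN, hq0⟩ := hI.hF (s, q1, q2) List.mem_cons_self
  simp only at hsk hqRN hq0
  subst hsk
  set cell := pvCellAt C k (q1, q2) with hcell
  have hqsrc0 : k = 0 → pvIsSrc C 0 (q1, q2) := by
    intro hk0
    rw [pvIsSrc, if_pos rfl]; exact hq0 hk0
  have hcin : pvInB C cell = true := by
    cases k with
    | zero =>
      rw [hcell, pvCellAt, if_pos rfl]
      exact pvW_inB C (hC.1 _ (hq0 rfl))
    | succ k' =>
      rw [← pvMem_all_iff]
      rcases Finset.mem_union.mp hqRN with h | h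
      · exact pvR_subset_all C hC _ h
      · exact pvN_subset_all C k' h
  -- the Python check and write at the raw coordinates touch exactly `cell`
  have hbg : ∀ u : List (List Int), pvShape C u → pvGet2 u q1 q2 = pvGet2 u cell.1 cell.2 := by
    intro u hu
    cases k with
    | zero =>
      have hwr : pvWrapRange C (q1, q2) := hC.1 _ (hq0 rfl)
      simpa [hcell, pvCellAt] using pvGet2_wrap C hu hwr
    | succ k' => simp [hcell, pvCellAt]
  have hbs : ∀ u : List (List Int), pvShape C u → ∀ v,
      pvSet2 u q1 q2 v = pvSet2 u cell.1 cell.2 v := by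
    intro u hu v
    cases k with
    | zero =>
      have hwr : pvWrapRange C (q1, q2) := hC.1 _ (hq0 rfl)
      simpa [hcell, pvCellAt] using pvSet2_wrap C hu hwr v
    | succ k' => simp [hcell, pvCellAt]
  have hcountP : (((((k : Int)), q1, q2) :: F') ++ B).countP (fun e => decide (e.1 = pvMAX)) =
      ((if (k : Int) = pvMAX then 1 else 0) +
        (F'.countP (fun e => decide (e.1 = pvMAX)) + B.countP (fun e => decide (e.1 = pvMAX)))) := by
    rw [List.cons_append, List.countP_cons, List.countP_append]
    simp only [decide_eq_true_eq]
    split <;> omega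
  rw [aLoop]
  by_cases hmk : pvGet2 t q1 q2 = pvMAX
  · rw [if_pos (by exact hmk)]
    have hmkc : pvGet2 t cell.1 cell.2 = pvMAX := by rw [← hbg t hI.shape]; exact hmk
    -- cell is unburnt: this entry burns it (a no-op write when k = pvMAXN) and expands it
    have hnotR : ∀ j < k, cell ∉ pvR C j := by
      intro j hj hmem
      exact hI.hprev j hj cell hmem hmkc
    have hcellN : k ≠ 0 → cell ∈ pvN C k := by
      intro hk0
      cases k with
      | zero => exact absurd rfl hk0
      | succ k' =>
        rcases Finset.mem_union.mp hqRN with h | h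
        · obtain ⟨j, hj, hassign⟩ := pvAssign_of_mem C h
          have hjk : j = k' + 1 := by
            rcases Nat.lt_or_ge j (k'+1) with hlt | hge
            · exact absurd hassign.1 (fun hmem => hnotR j hlt hmem)
            · omega
          rw [hjk] at hassign
          have hnMAX := pvAssign_ne_MAXN C hassign
          have h1 := hassign.1
          rw [pvR_succ, if_neg hnMAX] at h1
          rcases Finset.mem_union.mp h1 with h1 | h1
          · exact absurd h1 (hassign.2 k' (Nat.lt_succ_self k'))
          · exact h1
        · exact h
    have hqsrc : pvIsSrc C k (q1, q2) := by
      cases k with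
      | zero => exact hqsrc0 rfl
      | succ k' =>
        rw [pvIsSrc, if_neg (Nat.succ_ne_zero k')]
        have := hcellN (Nat.succ_ne_zero k')
        rwa [hcell, pvCellAt, if_neg (Nat.succ_ne_zero k')] at this
    set t' := pvSet2 t q1 q2 ((k : Int)) with ht'
    have ht'c : t' = pvSet2 t cell.1 cell.2 ((k : Int)) := by
      rw [ht']; exact hbs t hI.shape _
    have hshape' : pvShape C t' := by rw [ht'c]; exact pvShape_set C hI.shape hcin _
    have hget_q : pvGet2 t' cell.1 cell.2 = (k : Int) := by
      rw [ht'c]; exact pvGet2_set_same C hI.shape hcin _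
    have hget_o : ∀ r, pvInB C r = true → r ≠ cell →
        pvGet2 t' r.1 r.2 = pvGet2 t r.1 r.2 := by
      intro r hr hne
      rw [ht'c]; exact pvGet2_set_other C hI.shape hr hcin hne _
    have hmono : ∀ r, pvInB C r = true → pvGet2 t r.1 r.2 ≠ pvMAX →
        pvGet2 t' r.1 r.2 ≠ pvMAX := by
      intro r hr hrm
      by_cases hre : r = cell
      · subst hre
        rw [hget_q]
        intro hcast
        rw [pvMAX_cast_iff] at hcast
        -- a marked cell can never read the sentinel; here r was marked, contradiction below
        exact hrm hmkc
      · rw [hget_o r hr hre]; exact hrm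
    set news := ((pvNbrs q1 q2).filter (pvCond C.grid (C.mN : Int) (C.nN : Int) t')).map
        (fun p => ((k : Int) + 1, p.1, p.2)) with hnews
    have hnews_mem : ∀ e ∈ news, e.1 = (k : Int) + 1 ∧ e.2 ∈ pvNbrs q1 q2 ∧
        pvOk C e.2 = true ∧ pvGet2 t' e.2.1 e.2.2 = pvMAX := by
      intro e he
      rw [hnews, List.mem_map] at he
      obtain ⟨d, hd, rfl⟩ := he
      rw [List.mem_filter] at hd
      have hcond := hd.2
      simp only [pvCond, decide_eq_true_eq] at hcond
      obtain ⟨h1, h2, h3, h4, h5, h6⟩ := hcond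
      refine ⟨rfl, hd.1, ?_, h5⟩
      simp only [pvOk, pvInB, Bool.and_eq_true, decide_eq_true_eq]
      exact ⟨⟨⟨⟨h1, h2⟩, h3⟩, h4⟩, h6⟩
    have hnews_in : ∀ d, d ∈ pvNbrs q1 q2 → pvOk C d = true →
        pvGet2 t' d.1 d.2 = pvMAX → ((k : Int) + 1, d) ∈ news := by
      intro d hnb hok hfresh
      rw [hnews, List.mem_map]
      refine ⟨d, ?_, rfl⟩
      rw [List.mem_filter]
      refine ⟨hnb, ?_⟩
      simp only [pvOk, pvInB, Bool.and_eq_true, decide_eq_true_eq] at hok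
      simp only [pvCond, decide_eq_true_eq]
      exact ⟨hok.1.1.1.1, hok.1.1.1.2, hok.1.1.2, hok.1.2, hfresh, hok.2⟩
    have hfresh_t : ∀ d : Int × Int, pvInB C d = true → pvGet2 t' d.1 d.2 = pvMAX →
        pvGet2 t d.1 d.2 = pvMAX := by
      intro d hdin hd
      by_cases hde : d = cell
      · subst hde; exact hmkc
      · rwa [hget_o d hdin hde] at hd
    have hnews_RN : ∀ e ∈ news, e.2 ∈ pvRN C (k+1) := by
      intro e he
      obtain ⟨_, hnb, hok, hfresh⟩ := hnews_mem e he
      have hdin : pvInB C e.2 = true := pvOk_inB C hok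
      have hdt : pvGet2 t e.2.1 e.2.2 = pvMAX := hfresh_t e.2 hdin hfresh
      by_cases hdR : e.2 ∈ pvR C k
      · exact Finset.mem_union_left _ (pvR_mono_succ C k hdR)
      · refine Finset.mem_union_right _ (pvMem_N_intro C (pvIsSrc_mem_srcF C hqsrc) ?_ hdR)
        rw [pvNbrF, List.mem_toFinset, List.mem_filter]
        exact ⟨hnb, hok⟩
    have hhandle : ∀ d, pvInB C d = true → pvHandled B t d → pvHandled (B ++ news) t' d := by
      intro d hdin hd
      rcases hd with hd | ⟨e, he, hce⟩
      · exact Or.inl (hmono d hdin hd)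
      · exact Or.inr ⟨e, List.mem_append_left _ he, hce⟩
    have hexp_lift : ∀ p (hk : pvIsSrc C k p), pvExp C k B t p → pvExp C k (B ++ news) t' p := by
      intro p hk hp
      refine ⟨?_, ?_⟩
      · intro hkk
        exact hmono _ (pvCellAt_inB C hC hk) (hp.1 hkk)
      · intro d hd hok
        exact hhandle d (pvOk_inB C hok) (hp.2 d hd hok)
    have hexpQ : pvExp C k (B ++ news) t' (q1, q2) := by
      refine ⟨?_, ?_⟩
      · intro hkk
        rw [← hcell, hget_q]
        intro hcast
        rw [pvMAX_cast_iff] at hcast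
        exact hkk hcast
      · intro d hd hok
        by_cases hdm : pvGet2 t' d.1 d.2 = pvMAX
        · exact Or.inr ⟨_, List.mem_append_right _ (hnews_in d hd hok hdm), rfl⟩
        · exact Or.inl hdm
    have hI' : pvAInv C k F' (B ++ news) t' := by
      refine ⟨hshape', ?_, ?_, ?_, ?_, ?_, ?_⟩
      · exact fun e he => hI.hF e (List.mem_cons_of_mem _ he)
      · intro e he
        rcases List.mem_append.mp he with he | he
        · exact hI.hB e he
        · exact ⟨(hnews_mem e he).1, hnews_RN e he⟩
      · intro p hp hm
        by_cases hpe : p = cell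
        · subst hpe
          rw [hget_q] at hm ⊢
          by_cases hkM : k = pvMAXN
          · exfalso
            apply hm
            rw [pvMAX_cast_iff]
            exact hkM
          · refine ⟨k, le_refl k, ?_, rfl⟩
            cases k with
            | zero =>
              refine ⟨?_, by intro j hj; omega⟩
              rw [hcell, pvCellAt, if_pos rfl]
              exact pvW_mem_R0 C (hq0 rfl)
            | succ k' =>
              exact ⟨pvN_subset_R C hkM (hcellN (Nat.succ_ne_zero k')), hnotR⟩
        · rw [hget_o p hp hpe] at hm ⊢
          exact hI.hval p hp hm
      · intro j hj p hp
        exact hmono p ((pvMem_all_iff C p).mp (pvR_subset_all C hC j hp))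
          (hI.hprev j hj p hp)
      · intro p hpsrc
        rcases hI.hsrc p hpsrc with ⟨e, he, hce⟩ | hexp
        · rcases List.mem_cons.mp he with rfl | he
          · simp only at hce
            exact Or.inr (hce ▸ hexpQ)
          · exact Or.inl ⟨e, he, hce⟩
        · exact Or.inr (hexp_lift p hpsrc hexp)
      · intro p hpsrc hpm
        by_cases hpq : pvCellAt C k p = cell
        · have hpe : p = (q1, q2) := by
            cases k with
            | zero =>
              rw [pvIsSrc, if_pos rfl] at hpsrc
              apply hC.2 p hpsrc (q1, q2) (hq0 rfl)
              have h1 : pvCellAt C 0 p = pvW C p := by rw [pvCellAt, if_pos rfl]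
              have h2 : pvCellAt C 0 (q1, q2) = pvW C (q1, q2) := by rw [pvCellAt, if_pos rfl]
              rw [← h1, ← h2, hpq, hcell]
            | succ k' =>
              have h1 : pvCellAt C (k'+1) p = p := by rw [pvCellAt, if_neg (Nat.succ_ne_zero k')]
              have h2 : pvCellAt C (k'+1) (q1, q2) = (q1, q2) := by
                rw [pvCellAt, if_neg (Nat.succ_ne_zero k')]
              rw [← h1, hpq, hcell, h2]
          exact hpe ▸ hexpQ
        · rw [hget_o _ (pvCellAt_inB C hC hpsrc) hpq] at hpm
          exact hexp_lift p hpsrc (hI.hexp p hpsrc hpm)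
    -- the potential strictly decreases
    have hlen4 : news.length ≤ 4 := by
      rw [hnews, List.length_map]
      have := List.length_filter_le (pvCond C.grid (C.mN : Int) (C.nN : Int) t') (pvNbrs q1 q2)
      simpa [pvNbrs] using this
    have hphi : pvPhi C (F' ++ (B ++ news)) t' < f := by
      have hsplit : (F' ++ (B ++ news)).countP (fun e => decide (e.1 = pvMAX)) =
          F'.countP (fun e => decide (e.1 = pvMAX)) + B.countP (fun e => decide (e.1 = pvMAX)) +
          news.countP (fun e => decide (e.1 = pvMAX)) := by
        rw [List.countP_append, List.countP_append]
        omega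
      have hlen : (F' ++ (B ++ news)).length = F'.length + B.length + news.length := by
        simp only [List.length_append]; omega
      have hcpnews_le : news.countP (fun e => decide (e.1 = pvMAX)) ≤ news.length :=
        List.countP_le_length
      unfold pvPhi at hb ⊢
      rw [hcountP] at hb
      simp only [List.cons_append, List.length_cons, List.length_append] at hb
      rw [hsplit, hlen]
      by_cases hkM : k = pvMAXN
      · -- the stalled level: the write is a no-op, but the popped entry carried the sentinel
        have hcnt : pvCntU C t' = pvCntU C t := by
          apply pvCntU_congr
          intro p hp
          by_cases hpe : p = cell
          · subst hpe
            rw [hget_q, hmkc, (pvMAX_cast_iff k).mpr hkM]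
          · exact hget_o p hp hpe
        have hcpnews : news.countP (fun e => decide (e.1 = pvMAX)) = 0 := by
          rw [List.countP_eq_zero]
          intro e he
          have h1 := (hnews_mem e he).1
          simp only [decide_eq_true_eq]
          rw [h1, pvMAX_succ_cast_iff]
          simp only [pvMAXN] at hkM ⊢
          omega
        have hsk : (if (k : Int) = pvMAX then 1 else 0) = 1 := by
          rw [if_pos ((pvMAX_cast_iff k).mpr hkM)]
        rw [hcnt, hcpnews]
        omega
      · have hkint : ¬ ((k : Int) = pvMAX) := fun h => hkM ((pvMAX_cast_iff k).mp h)
        have hcnt : pvCntU C t' + 1 = pvCntU C t := by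
          rw [ht'c]
          exact pvCntU_set C hI.shape hcin hmkc (fun h => hkint h)
        have hsk : (if (k : Int) = pvMAX then 1 else 0) = 0 := by rw [if_neg hkint]
        omega
    have hres := ih k F' (B ++ news) t' hI' hphi
    rw [List.append_assoc]
    exact hres
  · rw [if_neg (by exact hmk)]
    have hmkc : pvGet2 t cell.1 cell.2 ≠ pvMAX := by rw [← hbg t hI.shape]; exact hmk
    -- cell already burnt: the stale entry is dropped
    have hI' : pvAInv C k F' B t := by
      refine ⟨hI.shape, fun e he => hI.hF e (List.mem_cons_of_mem _ he), hI.hB, hI.hval,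
        hI.hprev, ?_, hI.hexp⟩
      intro p hpsrc
      rcases hI.hsrc p hpsrc with ⟨e, he, hce⟩ | hexp
      · rcases List.mem_cons.mp he with rfl | he
        · simp only at hce
          right
          have hcp : pvCellAt C k p = cell := by rw [← hce, ← hcell]
          exact hI.hexp p hpsrc (by rw [hcp]; exact hmkc)
        · exact Or.inl ⟨e, he, hce⟩
      · exact Or.inr hexp
    have hphi : pvPhi C (F' ++ B) t < f := by
      unfold pvPhi at hb ⊢
      rw [hcountP] at hb
      simp only [List.cons_append, List.length_cons, List.length_append] at hb
      rw [List.countP_append, List.length_append]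
      split at hb <;> omega
    exact ih k F' B t hI' hphi

-- ---------- the A-side master lemma ----------

lemma pvALoop_good (C : PvCtx) (hC : pvGoodCtx C) :
    ∀ (fuel : Nat) (k : Nat) (F B : List (Int × Int × Int)) (t : List (List Int)),
      pvAInv C k F B t →
      pvPhi C (F ++ B) t < fuel →
      pvShape C (aLoop C.grid (C.mN : Int) (C.nN : Int) fuel (F ++ B) t) ∧
      ∀ p, pvInB C p = true →
        pvFinal C (pvGet2 (aLoop C.grid (C.mN : Int) (C.nN : Int) fuel (F ++ B) t) p.1 p.2) p := by
  intro fuel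
  induction fuel with
  | zero => intro k F B t hI hb; omega
  | succ f ih =>
    intro k F B t hI hb
    cases F with
    | nil =>
      cases B with
      | nil =>
        -- queue empty: the fire has stabilised
        simp only [List.nil_append]
        rw [aLoop]
        refine ⟨hI.shape, ?_⟩
        have hRkm := pvRk_marked C hI
        have hNe := pvNext_empty C hI
        have hstab := pvStab C hNe
        intro p hp
        by_cases hm : pvGet2 t p.1 p.2 = pvMAX
        · refine Or.inr ⟨?_, hm⟩
          intro j hj
          rcases Nat.lt_or_ge j k with hlt | hge
          · exact hRkm p (pvR_mono C (Nat.le_of_lt hlt) hj) hm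
          · have := (hstab j hge).1
            rw [this] at hj
            exact hRkm p hj hm
        · obtain ⟨j, _, hassign, hv⟩ := hI.hval p hp hm
          exact Or.inl ⟨j, hassign, hv⟩
      | cons b B' =>
        -- level change: the whole queue becomes the next level's front
        have hRkm := pvRk_marked C hI
        have hI' : pvAInv C (k+1) (b :: B') [] t := by
          refine ⟨hI.shape, ?_, by simp, ?_, ?_, ?_, ?_⟩
          · intro e he
            obtain ⟨h1, h2⟩ := hI.hB e he
            refine ⟨by push_cast; exact_mod_cast h1, ?_, by omega⟩
            rw [pvCellAt, if_neg (Nat.succ_ne_zero k)]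
            exact h2
          · intro p hp hm
            obtain ⟨j, hj, hl, hv⟩ := hI.hval p hp hm
            exact ⟨j, Nat.le_succ_of_le hj, hl, hv⟩
          · intro j hj p hp
            rcases Nat.lt_or_ge j k with hlt | hge
            · exact hI.hprev j hlt p hp
            · have hjk : j = k := by omega
              subst hjk
              exact hRkm p hp
          · intro p hpsrc
            rw [pvIsSrc, if_neg (Nat.succ_ne_zero k)] at hpsrc
            obtain ⟨⟨c, hc, hdF⟩, hdR⟩ := pvMem_N_elim C hpsrc
            rw [pvNbrF, List.mem_toFinset, List.mem_filter] at hdF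
            rcases hI.hsrc c (pvSrcF_mem_isSrc C hc) with ⟨e, he, _⟩ | hexp
            · simp at he
            · rcases hexp.2 p hdF.1 hdF.2 with hm | ⟨e, he, hce⟩
              · exfalso
                have hdin : pvInB C p = true := pvOk_inB C hdF.2
                obtain ⟨j, hj, hassign, _⟩ := hI.hval p hdin hm
                exact hdR (pvR_mono C hj hassign.1)
              · exact Or.inl ⟨e, he, hce⟩
          · intro p hpsrc hpm
            exfalso
            rw [pvIsSrc, if_neg (Nat.succ_ne_zero k)] at hpsrc
            have hcellp : pvCellAt C (k+1) p = p := by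
              rw [pvCellAt, if_neg (Nat.succ_ne_zero k)]
            rw [hcellp] at hpm
            have hdin : pvInB C p = true := by
              rw [← pvMem_all_iff]
              exact pvN_subset_all C k hpsrc
            obtain ⟨j, hj, hassign, _⟩ := hI.hval p hdin hpm
            exact pvN_disj C k p hpsrc (pvR_mono C hj hassign.1)
        obtain ⟨s, b1, b2⟩ := b
        have hb' : pvPhi C (((s, b1, b2) :: B') ++ []) t < f + 1 := by
          unfold pvPhi at hb ⊢
          simp only [List.nil_append, List.append_nil] at hb ⊢
          omega
        have hres := pvALoop_pop C hC f ih (k+1) s b1 b2 B' [] t hI' hb'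
        simpa using hres
    | cons e F' =>
      obtain ⟨s, e1, e2⟩ := e
      exact pvALoop_pop C hC f ih k s e1 e2 F' B t hI (by simpa using hb)

-- ---------- B-side invariant ----------

structure pvBInv (C : PvCtx) (k : Nat) (fr : List (Int × Int)) (t : List (List Int)) : Prop where
  shape : pvShape C t
  hmark : ∀ p, pvInB C p = true → (pvGet2 t p.1 p.2 ≠ pvMAX ↔ p ∈ pvR C k)
  hval : ∀ p, pvInB C p = true → pvGet2 t p.1 p.2 ≠ pvMAX →
    ∃ j ≤ k, pvAssign C p j ∧ pvGet2 t p.1 p.2 = (j : Int)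
  hfr : ∀ p, p ∈ fr ↔ pvIsSrc C k p

def pvMid (C : PvCtx) (k : Nat) (t tc : List (List Int)) (acc : List (Int × Int)) : Prop :=
  pvShape C tc ∧
  (∀ p ∈ acc, p ∈ pvN C (k+1)) ∧
  (∀ p, pvInB C p = true →
    pvGet2 tc p.1 p.2 =
      if (k + 1 ≠ pvMAXN ∧ p ∈ acc) then ((k : Int) + 1) else pvGet2 t p.1 p.2)

lemma pvBCand_step (C : PvCtx) (hC : pvGoodCtx C) {k : Nat} {t : List (List Int)}
    (hmk : ∀ p, pvInB C p = true → (pvGet2 t p.1 p.2 ≠ pvMAX ↔ p ∈ pvR C k))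
    {c d : Int × Int} (hc : pvIsSrc C k c) (hnb : d ∈ pvNbrs c.1 c.2)
    {tc : List (List Int)} {acc : List (Int × Int)} (hM : pvMid C k t tc acc) :
    pvMid C k t (bCand C.grid (C.mN : Int) (C.nN : Int) ((k : Int) + 1) (tc, acc) d).1
      (bCand C.grid (C.mN : Int) (C.nN : Int) ((k : Int) + 1) (tc, acc) d).2 ∧
    (∃ ext, (bCand C.grid (C.mN : Int) (C.nN : Int) ((k : Int) + 1) (tc, acc) d).2 = acc ++ ext) ∧
    (pvOk C d = true →
      d ∈ (bCand C.grid (C.mN : Int) (C.nN : Int) ((k : Int) + 1) (tc, acc) d).2 ∨ d ∈ pvR C k) := by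
  by_cases hcond : pvCond C.grid (C.mN : Int) (C.nN : Int) tc d = true
  · have hcomp : 0 ≤ d.1 ∧ d.1 < (C.mN : Int) ∧ 0 ≤ d.2 ∧ d.2 < (C.nN : Int) ∧
        pvGet2 tc d.1 d.2 = pvMAX ∧ pvGet2 C.grid d.1 d.2 = 0 := by
      simpa only [pvCond, decide_eq_true_eq] using hcond
    have hdin : pvInB C d = true := by
      rw [pvInB_iff]; exact ⟨hcomp.1, hcomp.2.1, hcomp.2.2.1, hcomp.2.2.2.1⟩
    have hdok : pvOk C d = true := by
      simp only [pvOk, Bool.and_eq_true, decide_eq_true_eq]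
      exact ⟨hdin, hcomp.2.2.2.2.2⟩
    have hdt : pvGet2 t d.1 d.2 = pvMAX := by
      have hv := hM.2.2 d hdin
      by_cases hif : (k + 1 ≠ pvMAXN ∧ d ∈ acc)
      · rw [if_pos hif] at hv
        exfalso
        have h1 := hcomp.2.2.2.2.1
        rw [hv, pvMAX_succ_cast_iff] at h1
        exact hif.1 h1
      · rw [if_neg hif] at hv
        rw [← hv]
        exact hcomp.2.2.2.2.1
    have hdR : d ∉ pvR C k := fun hmem => ((hmk d hdin).mpr hmem) hdt
    have hdN : d ∈ pvN C (k+1) := by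
      refine pvMem_N_intro C (pvIsSrc_mem_srcF C hc) ?_ hdR
      rw [pvNbrF, List.mem_toFinset, List.mem_filter]
      exact ⟨hnb, hdok⟩
    simp only [bCand, if_pos hcond]
    refine ⟨⟨pvShape_set C hM.1 hdin _, ?_, ?_⟩, ⟨[d], rfl⟩, ?_⟩
    · intro p hp
      rcases List.mem_append.mp hp with hp | hp
      · exact hM.2.1 p hp
      · rw [List.mem_singleton] at hp; subst hp; exact hdN
    · intro p hp
      by_cases hpd : p = d
      · subst hpd
        rw [pvGet2_set_same C hM.1 hdin _]
        by_cases hstall : k + 1 = pvMAXN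
        · rw [if_neg (by simp [hstall])]
          rw [hdt, pvMAX_succ_cast_iff]
          exact hstall
        · rw [if_pos ⟨hstall, List.mem_append_right _ List.mem_cons_self⟩]
      · rw [pvGet2_set_other C hM.1 hp hdin hpd _]
        have hiff : (p ∈ acc ++ [d]) ↔ p ∈ acc := by simp [hpd]
        have hv := hM.2.2 p hp
        by_cases hif : (k + 1 ≠ pvMAXN ∧ p ∈ acc)
        · rw [if_pos hif] at hv
          rw [if_pos ⟨hif.1, hiff.mpr hif.2⟩]
          exact hv
        · rw [if_neg hif] at hv
          rw [if_neg (fun hx => hif ⟨hx.1, hiff.mp hx.2⟩)]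
          exact hv
    · intro _
      exact Or.inl (List.mem_append_right _ List.mem_cons_self)
  · simp only [bCand, if_neg hcond]
    refine ⟨hM, ⟨[], by simp⟩, ?_⟩
    intro hok
    have hdin : pvInB C d = true := pvOk_inB C hok
    have hgrid : pvGet2 C.grid d.1 d.2 = 0 := by
      simp only [pvOk, Bool.and_eq_true, decide_eq_true_eq] at hok
      exact hok.2
    have hdinP := (pvInB_iff C d).mp hdin
    have hnm : pvGet2 tc d.1 d.2 ≠ pvMAX := by
      intro hmax
      apply hcond
      simp only [pvCond, decide_eq_true_eq]
      exact ⟨hdinP.1, hdinP.2.1, hdinP.2.2.1, hdinP.2.2.2, hmax, hgrid⟩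
    have hv := hM.2.2 d hdin
    by_cases hif : (k + 1 ≠ pvMAXN ∧ d ∈ acc)
    · exact Or.inl hif.2
    · rw [if_neg hif] at hv
      rw [hv] at hnm
      exact Or.inr ((hmk d hdin).mp hnm)

lemma pvBCand_fold (C : PvCtx) (hC : pvGoodCtx C) {k : Nat} {t : List (List Int)}
    (hmk : ∀ p, pvInB C p = true → (pvGet2 t p.1 p.2 ≠ pvMAX ↔ p ∈ pvR C k))
    {c : Int × Int} (hc : pvIsSrc C k c) :
    ∀ (D : List (Int × Int)), (∀ d ∈ D, d ∈ pvNbrs c.1 c.2) →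
    ∀ (tc : List (List Int)) (acc : List (Int × Int)), pvMid C k t tc acc →
    pvMid C k t (D.foldl (bCand C.grid (C.mN : Int) (C.nN : Int) ((k : Int) + 1)) (tc, acc)).1
      (D.foldl (bCand C.grid (C.mN : Int) (C.nN : Int) ((k : Int) + 1)) (tc, acc)).2 ∧
    (∃ ext, (D.foldl (bCand C.grid (C.mN : Int) (C.nN : Int) ((k : Int) + 1)) (tc, acc)).2 = acc ++ ext) ∧
    (∀ d ∈ D, pvOk C d = true →
      d ∈ (D.foldl (bCand C.grid (C.mN : Int) (C.nN : Int) ((k : Int) + 1)) (tc, acc)).2 ∨ d ∈ pvR C k) := by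
  intro D
  induction D with
  | nil => intro _ tc acc hM; exact ⟨hM, ⟨[], by simp⟩, by simp⟩
  | cons d D' ihD =>
    intro hD tc acc hM
    obtain ⟨hM1, ⟨ext1, hext1⟩, hmarked⟩ :=
      pvBCand_step C hC hmk hc (hD d List.mem_cons_self) hM
    simp only [List.foldl_cons]
    obtain h1 := ihD (fun d' hd' => hD d' (List.mem_cons_of_mem _ hd'))
      (bCand C.grid (C.mN : Int) (C.nN : Int) ((k : Int) + 1) (tc, acc) d).1
      (bCand C.grid (C.mN : Int) (C.nN : Int) ((k : Int) + 1) (tc, acc) d).2 hM1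
    refine ⟨h1.1, ?_, ?_⟩
    · obtain ⟨ext2, hext2⟩ := h1.2.1
      exact ⟨ext1 ++ ext2, by rw [hext2, hext1, List.append_assoc]⟩
    · intro d' hd' hok'
      rcases List.mem_cons.mp hd' with rfl | hd'
      · rcases hmarked hok' with hin | hR
        · obtain ⟨ext2, hext2⟩ := h1.2.1
          exact Or.inl (by rw [hext2]; exact List.mem_append_left _ hin)
        · exact Or.inr hR
      · exact h1.2.2 d' hd' hok'

lemma pvBLevel_fold (C : PvCtx) (hC : pvGoodCtx C) {k : Nat} {t : List (List Int)}
    (hmk : ∀ p, pvInB C p = true → (pvGet2 t p.1 p.2 ≠ pvMAX ↔ p ∈ pvR C k)) :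
    ∀ (L : List (Int × Int)), (∀ c ∈ L, pvIsSrc C k c) →
    ∀ (tc : List (List Int)) (acc : List (Int × Int)), pvMid C k t tc acc →
    pvMid C k t (L.foldl (bLevel C.grid (C.mN : Int) (C.nN : Int) ((k : Int) + 1)) (tc, acc)).1
      (L.foldl (bLevel C.grid (C.mN : Int) (C.nN : Int) ((k : Int) + 1)) (tc, acc)).2 ∧
    (∃ ext, (L.foldl (bLevel C.grid (C.mN : Int) (C.nN : Int) ((k : Int) + 1)) (tc, acc)).2 = acc ++ ext) ∧
    (∀ c ∈ L, ∀ d ∈ pvNbrs c.1 c.2, pvOk C d = true →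
      d ∈ (L.foldl (bLevel C.grid (C.mN : Int) (C.nN : Int) ((k : Int) + 1)) (tc, acc)).2 ∨ d ∈ pvR C k) := by
  intro L
  induction L with
  | nil => intro _ tc acc hM; exact ⟨hM, ⟨[], by simp⟩, by simp⟩
  | cons c L' ihL =>
    intro hL tc acc hM
    have hcT : pvIsSrc C k c := hL c List.mem_cons_self
    obtain ⟨hM1, ⟨ext1, hext1⟩, hmarked⟩ :=
      pvBCand_fold C hC hmk hcT (pvNbrs c.1 c.2) (fun _ h => h) tc acc hM
    simp only [List.foldl_cons, bLevel]
    obtain h1 := ihL (fun c' hc' => hL c' (List.mem_cons_of_mem _ hc'))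
      ((pvNbrs c.1 c.2).foldl (bCand C.grid (C.mN : Int) (C.nN : Int) ((k : Int) + 1)) (tc, acc)).1
      ((pvNbrs c.1 c.2).foldl (bCand C.grid (C.mN : Int) (C.nN : Int) ((k : Int) + 1)) (tc, acc)).2 hM1
    refine ⟨h1.1, ?_, ?_⟩
    · obtain ⟨ext2, hext2⟩ := h1.2.1
      exact ⟨ext1 ++ ext2, by rw [hext2, hext1, List.append_assoc]⟩
    · intro c' hc' d hd hok
      rcases List.mem_cons.mp hc' with rfl | hc'
      · rcases hmarked d hd hok with hin | hR
        · obtain ⟨ext2, hext2⟩ := h1.2.1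
          exact Or.inl (by rw [hext2]; exact List.mem_append_left _ hin)
        · exact Or.inr hR
      · exact h1.2.2 c' hc' d hd hok

-- when the frontier is empty the fire has stabilised
lemma pvBEnd (C : PvCtx) {k : Nat} {t : List (List Int)}
    (hI : pvBInv C k [] t) :
    pvShape C t ∧ ∀ p, pvInB C p = true → pvFinal C (pvGet2 t p.1 p.2) p := by
  have hnosrc : ∀ p, ¬ pvIsSrc C k p := by
    intro p hp
    exact (List.not_mem_nil (a := p)) ((hI.hfr p).mpr hp)
  have hsrcF : pvSrcF C k = ∅ := by
    rw [Finset.eq_empty_iff_forall_notMem]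
    intro p hp
    exact hnosrc p (pvSrcF_mem_isSrc C hp)
  have hNe : pvN C (k+1) = ∅ := by
    rw [pvN_succ, hsrcF]
    simp
  have hstab := pvStab C hNe
  refine ⟨hI.shape, ?_⟩
  intro p hp
  by_cases hm : pvGet2 t p.1 p.2 = pvMAX
  · refine Or.inr ⟨?_, hm⟩
    intro j hj
    rcases Nat.lt_or_ge j k with hlt | hge
    · exact absurd ((hI.hmark p hp).mpr (pvR_mono C (Nat.le_of_lt hlt) hj)) (fun hx => hx hm)
    · have := (hstab j hge).1
      rw [this] at hj
      exact absurd ((hI.hmark p hp).mpr hj) (fun hx => hx hm)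
  · obtain ⟨j, _, hassign, hv⟩ := hI.hval p hp hm
    exact Or.inl ⟨j, hassign, hv⟩

lemma pvBLoop_good (C : PvCtx) (hC : pvGoodCtx C) :
    ∀ (fuel : Nat) (k : Nat) (fr : List (Int × Int)) (t : List (List Int)),
      pvBInv C k fr t →
      C.mN * C.nN + 4 ≤ fuel + k →
      pvShape C (bLoop C.grid (C.mN : Int) (C.nN : Int) fuel ((k : Int) + 1) fr t) ∧
      ∀ p, pvInB C p = true →
        pvFinal C (pvGet2 (bLoop C.grid (C.mN : Int) (C.nN : Int) fuel ((k : Int) + 1) fr t) p.1 p.2) p := by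
  intro fuel
  induction fuel with
  | zero =>
    intro k fr t hI hb
    have hfr : fr = [] := by
      cases fr with
      | nil => rfl
      | cons p fr' =>
        exfalso
        have hsrc : pvIsSrc C k p := (hI.hfr p).mp List.mem_cons_self
        have hk1 : k ≠ 0 := by omega
        rw [pvIsSrc, if_neg hk1] at hsrc
        have h1 := pvN_card C hC ⟨p, hsrc⟩
        omega
    subst hfr
    rw [bLoop]
    exact pvBEnd C hI
  | succ f ih =>
    intro k fr t hI hb
    rw [bLoop]
    by_cases hfr : fr = []
    · rw [if_pos hfr]
      subst hfr
      exact pvBEnd C hI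
    · rw [if_neg hfr]
      have hLmem : ∀ c ∈ fr, pvIsSrc C k c := fun c hc => (hI.hfr c).mp hc
      have hM0 : pvMid C k t t [] := by
        refine ⟨hI.shape, by simp, ?_⟩
        intro p hp
        simp
      obtain ⟨hM, ⟨ext, hext⟩, hcompl⟩ :=
        pvBLevel_fold C hC hI.hmark fr hLmem t [] hM0
      set st := fr.foldl (bLevel C.grid (C.mN : Int) (C.nN : Int) ((k : Int) + 1))
        (t, ([] : List (Int × Int))) with hst
      have haccN : ∀ p ∈ st.2, p ∈ pvN C (k+1) := hM.2.1
      have hNacc : ∀ d ∈ pvN C (k+1), d ∈ st.2 := by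
        intro d hd
        obtain ⟨⟨c, hc, hdF⟩, hdR⟩ := pvMem_N_elim C hd
        rw [pvNbrF, List.mem_toFinset, List.mem_filter] at hdF
        have hcfr : c ∈ fr := (hI.hfr c).mpr (pvSrcF_mem_isSrc C hc)
        rcases hcompl c hcfr d hdF.1 hdF.2 with hin | hR
        · exact hin
        · exact absurd hR hdR
      have hmark' : ∀ p, pvInB C p = true →
          (pvGet2 st.1 p.1 p.2 ≠ pvMAX ↔ p ∈ pvR C (k+1)) := by
        intro p hp
        have hv := hM.2.2 p hp
        by_cases hif : (k + 1 ≠ pvMAXN ∧ p ∈ st.2)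
        · rw [if_pos hif] at hv
          constructor
          · intro _
            exact pvN_subset_R C hif.1 (haccN p hif.2)
          · intro _
            rw [hv]
            intro hcast
            exact hif.1 ((pvMAX_succ_cast_iff k).mp hcast)
        · rw [if_neg hif] at hv
          rw [hv, hI.hmark p hp]
          by_cases hstall : k + 1 = pvMAXN
          · rw [pvR_succ, if_pos hstall]
          · have hpacc : p ∉ st.2 := fun hx => hif ⟨hstall, hx⟩
            rw [pvR_succ, if_neg hstall]
            constructor
            · intro h
              exact Finset.mem_union_left _ h
            · intro h
              rcases Finset.mem_union.mp h with h | h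
              · exact h
              · exact absurd (hNacc p h) hpacc
      have hI' : pvBInv C (k+1) st.2 st.1 := by
        refine ⟨hM.1, hmark', ?_, ?_⟩
        · intro p hp hm
          have hv := hM.2.2 p hp
          by_cases hif : (k + 1 ≠ pvMAXN ∧ p ∈ st.2)
          · rw [if_pos hif] at hv
            refine ⟨k+1, le_refl _, ⟨pvN_subset_R C hif.1 (haccN p hif.2), ?_⟩, by
              rw [hv]; push_cast; ring⟩
            intro j hj hmem
            exact pvN_disj C k p (haccN p hif.2) (pvR_mono C (Nat.lt_succ_iff.mp hj) hmem)
          · rw [if_neg hif] at hv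
            rw [hv] at hm ⊢
            obtain ⟨j, hj, hassign, hvv⟩ := hI.hval p hp hm
            exact ⟨j, Nat.le_succ_of_le hj, hassign, hvv⟩
        · intro p
          rw [pvIsSrc, if_neg (Nat.succ_ne_zero k)]
          exact ⟨haccN p, hNacc p⟩
      have hres := ih (k+1) st.2 st.1 hI' (by omega)
      have hcast : (((k+1 : Nat)) : Int) + 1 = ((k : Int) + 1) + 1 := by push_cast; ring
      rw [hcast] at hres
      exact hres

-- ---------- assembly ----------

lemma pvEq_of_final (C : PvCtx) {u v : List (List Int)}
    (hu : pvShape C u) (hv : pvShape C v)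
    (hfu : ∀ p, pvInB C p = true → pvFinal C (pvGet2 u p.1 p.2) p)
    (hfv : ∀ p, pvInB C p = true → pvFinal C (pvGet2 v p.1 p.2) p) : u = v := by
  apply List.ext_getElem
  · rw [hu.1, hv.1]
  intro i h1 h2
  apply List.ext_getElem
  · rw [hu.2 _ (List.getElem_mem h1), hv.2 _ (List.getElem_mem h2)]
  intro j hj1 hj2
  have hiu : i < C.mN := by rw [← hu.1]; exact h1
  have hjn : j < C.nN := by
    have := hu.2 _ (List.getElem_mem h1); omega
  have hp : pvInB C ((i : Int), (j : Int)) = true := by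
    rw [pvInB_iff]
    refine ⟨by positivity, by simpa using hiu, by positivity, by simpa using hjn⟩
  have e1 : pvGet2 u (i : Int) (j : Int) = u[i][j] := by
    simp only [pvGet2, pvIdx_natCast]
    rw [List.getD_eq_getElem u [] h1, List.getD_eq_getElem _ 0 hj1]
  have e2 : pvGet2 v (i : Int) (j : Int) = v[i][j] := by
    simp only [pvGet2, pvIdx_natCast]
    rw [List.getD_eq_getElem v [] h2, List.getD_eq_getElem _ 0 hj2]
  rw [← e1, ← e2]
  exact pvFinal_unique C (hfu _ hp) (hfv _ hp)

-- seeding B's frontier: every distinct fire cell is marked 0 and its raw coordinates collected once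
set_option maxHeartbeats 2000000 in
lemma pvBSeed_fold (C : PvCtx) (hC : pvGoodCtx C) :
    ∀ (fs : List (List Int)) (tc : List (List Int)) (acc S : List (Int × Int)),
      (∀ f ∈ fs, (f.getD 0 0, f.getD 1 0) ∈ C.fires0) →
      pvShape C tc →
      (∀ p, pvInB C p = true →
        pvGet2 tc p.1 p.2 = (if p ∈ acc.map (pvW C) then 0 else pvMAX)) →
      (∀ p, p ∈ acc ↔ p ∈ S) →
      (∀ p ∈ acc, p ∈ C.fires0) →
      pvShape C (fs.foldl bSeed (tc, acc)).1 ∧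
      (∀ p, pvInB C p = true → pvGet2 (fs.foldl bSeed (tc, acc)).1 p.1 p.2 =
        (if p ∈ (fs.foldl bSeed (tc, acc)).2.map (pvW C) then 0 else pvMAX)) ∧
      (∀ p, p ∈ (fs.foldl bSeed (tc, acc)).2 ↔
        p ∈ S ++ fs.map (fun f => (f.getD 0 0, f.getD 1 0))) ∧
      (∀ p ∈ (fs.foldl bSeed (tc, acc)).2, p ∈ C.fires0) := by
  intro fs
  induction fs with
  | nil =>
    intro tc acc S _ hsh hval hS hsub
    refine ⟨hsh, hval, ?_, hsub⟩
    intro p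
    simp only [List.foldl_nil, List.map_nil, List.append_nil]
    exact hS p
  | cons f fs' ihf =>
    intro tc acc S hin hsh hval hS hsub
    have hpos : (f.getD 0 0, f.getD 1 0) ∈ C.fires0 := hin f List.mem_cons_self
    have hwr : pvWrapRange C (f.getD 0 0, f.getD 1 0) := hC.1 _ hpos
    have hwin : pvInB C (pvW C (f.getD 0 0, f.getD 1 0)) = true := pvW_inB C hwr
    have hbridge : pvGet2 tc (f.getD 0 0) (f.getD 1 0) =
        pvGet2 tc (pvW C (f.getD 0 0, f.getD 1 0)).1 (pvW C (f.getD 0 0, f.getD 1 0)).2 := by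
      exact pvGet2_wrap C hsh hwr
    simp only [List.foldl_cons]
    by_cases hfresh : pvGet2 tc (f.getD 0 0) (f.getD 1 0) = pvMAX
    · have hstep : bSeed (tc, acc) f =
          (pvSet2 tc (f.getD 0 0) (f.getD 1 0) 0, acc ++ [(f.getD 0 0, f.getD 1 0)]) := by
        simp only [bSeed, if_pos hfresh]
      simp only [hstep]
      have hnmap : pvW C (f.getD 0 0, f.getD 1 0) ∉ acc.map (pvW C) := by
        intro hmem
        have := hval _ hwin
        rw [if_pos hmem] at this
        rw [hbridge, this] at hfresh
        norm_num [pvMAX] at hfresh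
      have hsetb : pvSet2 tc (f.getD 0 0) (f.getD 1 0) 0 =
          pvSet2 tc (pvW C (f.getD 0 0, f.getD 1 0)).1 (pvW C (f.getD 0 0, f.getD 1 0)).2 0 :=
        pvSet2_wrap C hsh hwr 0
      have hres := ihf (pvSet2 tc (f.getD 0 0) (f.getD 1 0) 0)
        (acc ++ [(f.getD 0 0, f.getD 1 0)]) (S ++ [(f.getD 0 0, f.getD 1 0)])
        (fun g hg => hin g (List.mem_cons_of_mem _ hg))
        (by rw [hsetb]; exact pvShape_set C hsh hwin 0) ?_ ?_ ?_
      · refine ⟨hres.1, hres.2.1, ?_, hres.2.2.2⟩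
        intro p
        rw [hres.2.2.1 p, List.append_assoc]
        simp
      · intro p hp
        by_cases hpd : p = pvW C (f.getD 0 0, f.getD 1 0)
        · subst hpd
          rw [hsetb, pvGet2_set_same C hsh hwin 0,
            if_pos (by rw [List.map_append]; exact List.mem_append_right _ (by simp))]
        · rw [hsetb, pvGet2_set_other C hsh hp hwin hpd 0, hval p hp]
          have hiff : (p ∈ (acc ++ [(f.getD 0 0, f.getD 1 0)]).map (pvW C)) ↔
              p ∈ acc.map (pvW C) := by
            rw [List.map_append]
            simp only [List.mem_append, List.map_cons, List.map_nil, List.mem_singleton]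
            constructor
            · rintro (h | h)
              · exact h
              · exact absurd h hpd
            · exact Or.inl
          by_cases hpa : p ∈ acc.map (pvW C)
          · rw [if_pos hpa, if_pos (hiff.mpr hpa)]
          · rw [if_neg hpa, if_neg (fun hx => hpa (hiff.mp hx))]
      · intro p
        rw [List.mem_append, List.mem_append, hS p]
      · intro p hp
        rcases List.mem_append.mp hp with hp | hp
        · exact hsub p hp
        · rw [List.mem_singleton] at hp; subst hp; exact hpos
    · have hstep : bSeed (tc, acc) f = (tc, acc) := by
        simp only [bSeed, if_neg hfresh]
      simp only [hstep]
      have hacc : (f.getD 0 0, f.getD 1 0) ∈ acc := by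
        by_contra hx
        have hnm : pvW C (f.getD 0 0, f.getD 1 0) ∈ acc.map (pvW C) := by
          by_contra hy
          have := hval _ hwin
          rw [if_neg hy] at this
          rw [hbridge] at hfresh
          exact hfresh this
        rw [List.mem_map] at hnm
        obtain ⟨r, hr, hwre⟩ := hnm
        have : r = (f.getD 0 0, f.getD 1 0) := hC.2 r (hsub r hr) _ hpos hwre
        rw [this] at hr
        exact hx hr
      have hres := ihf tc acc (S ++ [(f.getD 0 0, f.getD 1 0)])
        (fun g hg => hin g (List.mem_cons_of_mem _ hg)) hsh hval ?_ hsub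
      · refine ⟨hres.1, hres.2.1, ?_, hres.2.2.2⟩
        intro p
        rw [hres.2.2.1 p, List.append_assoc]
        simp
      · intro p
        rw [hS p, List.mem_append, List.mem_singleton]
        constructor
        · exact Or.inl
        · rintro (h | h)
          · exact h
          · subst h; exact (hS _).mp hacc

-- ===== VERDICT (by name: the statement is the Claim_ definition above) =====
theorem getFireTimes_spec : Claim_equal_getFireTimes := by
  intro grid fires _ hPre
  obtain ⟨hne, hfires, hinj, hrows⟩ := hPre
  set C : PvCtx :=
    ⟨grid, grid.length, (grid.headD []).length,
      fires.map (fun f => (f.getD 0 0, f.getD 1 0))⟩ with hCdef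
  have hC : pvGoodCtx C := by
    refine ⟨?_, ?_⟩
    · intro p hp
      simp only [hCdef, List.mem_map] at hp
      obtain ⟨f, hf, rfl⟩ := hp
      obtain ⟨_, h1, h2, h3, h4⟩ := hfires f hf
      exact ⟨h1, h2, h3, h4⟩
    · intro p hp q hq hw
      simp only [hCdef, List.mem_map] at hp hq
      obtain ⟨f, hf, rfl⟩ := hp
      obtain ⟨g, hg, rfl⟩ := hq
      have hw1 := congrArg Prod.fst hw
      have hw2 := congrArg Prod.snd hw
      simp only [pvW, hCdef] at hw1 hw2
      obtain ⟨he1, he2⟩ := hinj f hf g hg hw1 hw2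
      rw [he1, he2]
  -- port A reaches the stable fire times
  have hAinv : pvAInv C 0
      ((fires.map (fun f => ((0 : Int), f.getD 0 0, f.getD 1 0))).reverse) []
      (List.replicate C.mN (List.replicate C.nN pvMAX)) := by
    refine ⟨pvShape_init C, ?_, by simp, ?_, by omega, ?_, ?_⟩
    · intro e he
      rw [List.mem_reverse, List.mem_map] at he
      obtain ⟨f, hf, rfl⟩ := he
      refine ⟨by norm_num, ?_, ?_⟩
      · rw [pvCellAt, if_pos rfl]
        refine Finset.mem_union_left _ (pvW_mem_R0 C ?_)
        simp only [hCdef, List.mem_map]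
        exact ⟨f, hf, rfl⟩
      · intro _
        simp only [hCdef, List.mem_map]
        exact ⟨f, hf, rfl⟩
    · intro p hp hm
      exact absurd (pvGet2_init C hp) hm
    · intro p hpsrc
      rw [pvIsSrc, if_pos rfl] at hpsrc
      simp only [hCdef, List.mem_map] at hpsrc
      obtain ⟨f, hf, rfl⟩ := hpsrc
      refine Or.inl ⟨((0 : Int), f.getD 0 0, f.getD 1 0), ?_, rfl⟩
      rw [List.mem_reverse, List.mem_map]
      exact ⟨f, hf, rfl⟩
    · intro p hpsrc hpm
      exfalso
      apply hpm
      apply pvGet2_init C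
      exact pvCellAt_inB C hC hpsrc
  have hphiA : pvPhi C
      (((fires.map (fun f => ((0 : Int), f.getD 0 0, f.getD 1 0))).reverse) ++ [])
      (List.replicate C.mN (List.replicate C.nN pvMAX)) <
      fires.length + 20 * (C.mN * C.nN) + 1 := by
    have h1 := pvCntU_le C (List.replicate C.mN (List.replicate C.nN pvMAX))
    have h2 : ((fires.map (fun f => ((0 : Int), f.getD 0 0, f.getD 1 0))).reverse ++
        ([] : List (Int × Int × Int))).countP (fun e => decide (e.1 = pvMAX)) = 0 := by
      rw [List.countP_eq_zero]
      intro e he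
      rw [List.append_nil, List.mem_reverse, List.mem_map] at he
      obtain ⟨f, _, rfl⟩ := he
      simp [pvMAX]
    unfold pvPhi
    rw [h2]
    simp only [List.append_nil, List.length_reverse, List.length_map]
    omega
  have hA := pvALoop_good C hC (fires.length + 20 * (C.mN * C.nN) + 1) 0
    ((fires.map (fun f => ((0 : Int), f.getD 0 0, f.getD 1 0))).reverse) []
    (List.replicate C.mN (List.replicate C.nN pvMAX)) hAinv hphiA
  rw [List.append_nil] at hA
  -- port B reaches the stable fire times
  have hSeed := pvBSeed_fold C hC fires (List.replicate C.mN (List.replicate C.nN pvMAX)) [] []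
    (by
      intro f hf
      simp only [hCdef, List.mem_map]
      exact ⟨f, hf, rfl⟩)
    (pvShape_init C)
    (by
      intro p hp
      rw [if_neg (by simp)]
      exact pvGet2_init C hp)
    (by simp)
    (by simp)
  have hfires0 : ∀ p, p ∈ (fires.foldl bSeed
      (List.replicate C.mN (List.replicate C.nN pvMAX), ([] : List (Int × Int)))).2 ↔
      p ∈ C.fires0 := by
    intro p
    rw [hSeed.2.2.1 p]
    simp [hCdef]
  have hR0iff : ∀ p, p ∈ pvR C 0 ↔ p ∈ (fires.foldl bSeed
      (List.replicate C.mN (List.replicate C.nN pvMAX), ([] : List (Int × Int)))).2.map (pvW C) := by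
    intro p
    rw [pvR_zero, List.mem_toFinset, List.mem_map, List.mem_map]
    constructor
    · rintro ⟨r, hr, rfl⟩
      exact ⟨r, (hfires0 r).mpr hr, rfl⟩
    · rintro ⟨r, hr, rfl⟩
      exact ⟨r, (hfires0 r).mp hr, rfl⟩
  have hBinv : pvBInv C 0
      (fires.foldl bSeed (List.replicate C.mN (List.replicate C.nN pvMAX), ([] : List (Int × Int)))).2
      (fires.foldl bSeed (List.replicate C.mN (List.replicate C.nN pvMAX), ([] : List (Int × Int)))).1 := by
    refine ⟨hSeed.1, ?_, ?_, ?_⟩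
    · intro p hp
      rw [hSeed.2.1 p hp]
      by_cases hx : p ∈ (fires.foldl bSeed
          (List.replicate C.mN (List.replicate C.nN pvMAX), ([] : List (Int × Int)))).2.map (pvW C)
      · rw [if_pos hx]
        constructor
        · intro _; exact (hR0iff p).mpr hx
        · intro _; norm_num [pvMAX]
      · rw [if_neg hx]
        constructor
        · intro h; exact absurd rfl h
        · intro h; exact absurd ((hR0iff p).mp h) hx
    · intro p hp hm
      rw [hSeed.2.1 p hp] at hm ⊢
      by_cases hx : p ∈ (fires.foldl bSeed
          (List.replicate C.mN (List.replicate C.nN pvMAX), ([] : List (Int × Int)))).2.map (pvW C)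
      · refine ⟨0, le_refl 0, ⟨(hR0iff p).mpr hx, by omega⟩, ?_⟩
        rw [if_pos hx]
        norm_num
      · rw [if_neg hx] at hm
        exact absurd rfl hm
    · intro p
      rw [pvIsSrc, if_pos rfl]
      exact hfires0 p
  have hB := pvBLoop_good C hC (C.mN * C.nN + 4) 0
    (fires.foldl bSeed (List.replicate C.mN (List.replicate C.nN pvMAX), ([] : List (Int × Int)))).2
    (fires.foldl bSeed (List.replicate C.mN (List.replicate C.nN pvMAX), ([] : List (Int × Int)))).1
    hBinv (by omega)
  have hcast0 : (((0 : Nat)) : Int) + 1 = (1 : Int) := by norm_num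
  rw [hcast0] at hB
  -- the two ports compute the same stable table
  have hAeq : getFireTimes grid fires =
      aLoop C.grid (C.mN : Int) (C.nN : Int) (fires.length + 20 * (C.mN * C.nN) + 1)
        ((fires.map (fun f => ((0 : Int), f.getD 0 0, f.getD 1 0))).reverse)
        (List.replicate C.mN (List.replicate C.nN pvMAX)) := rfl
  have hBeq : getFireTimes_alt grid fires =
      bLoop C.grid (C.mN : Int) (C.nN : Int) (C.mN * C.nN + 4) 1
        (fires.foldl bSeed (List.replicate C.mN (List.replicate C.nN pvMAX), ([] : List (Int × Int)))).2
        (fires.foldl bSeed (List.replicate C.mN (List.replicate C.nN pvMAX), ([] : List (Int × Int)))).1 := rfl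
  show getFireTimes grid fires = getFireTimes_alt grid fires
  rw [hAeq, hBeq]
  exact pvEq_of_final C hA.1 hB.1 hA.2 hB.2
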